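-- pv_equiv track=rewrite | github.com/GitMonsters/octotetrahedral-agi | arc-puzzle-catalog/re-arc/solves/25072825/solver.py | transform
-- ===== SOURCE A (Python) =====
-- def transform(input_grid):
--     from collections import Counter
--
--     grid = [row[:] for row in input_grid]
--     rows = len(grid)
--     cols = len(grid[0])
--
--     # Find background color (most common)
--     color_counts = Counter()
--     for r in range(rows):
--         for c in range(cols):
--             color_counts[grid[r][c]] += 1
--     bg = color_counts.most_common(1)[0][0]
--
--     # Find connected components of non-background cells
--     visited = [[False] * cols for _ in range(rows)]
--     objects = []
--
--     for r in range(rows):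
--         for c in range(cols):
--             if grid[r][c] != bg and not visited[r][c]:
--                 color = grid[r][c]
--                 component = []
--                 stack = [(r, c)]
--                 visited[r][c] = True
--                 while stack:
--                     cr, cc = stack.pop()
--                     component.append((cr, cc))
--                     for dr, dc in [(-1, 0), (1, 0), (0, -1), (0, 1)]:
--                         nr, nc = cr + dr, cc + dc
--                         if 0 <= nr < rows and 0 <= nc < cols and not visited[nr][nc] and grid[nr][nc] == color:
--                             visited[nr][nc] = True
--                             stack.append((nr, nc))
--                 objects.append((color, component))
--
--     # For each object, punch holes where both row and col offset are odd
--     for color, component in objects: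
--         min_r = min(r for r, c in component)
--         min_c = min(c for r, c in component)
--         for r, c in component:
--             if (r - min_r) % 2 == 1 and (c - min_c) % 2 == 1:
--                 grid[r][c] = bg
--
--     return grid
-- ===== SOURCE B (Python) =====
-- def transform(input_grid):
--     rows = len(input_grid)
--     cols = len(input_grid[0])
--
--     # background = most frequent color (first-seen wins ties, like Counter.most_common)
--     counts = {}
--     for row in input_grid:
--         for v in row:
--             counts[v] = counts.get(v, 0) + 1
--     bg = max(counts, key=lambda v: counts[v])
--
--     # weighted quick-find union-find: label[cell] = representative cell,
--     # members[rep] = list of cells of rep's class; a single raster pass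
--     # unions every non-background cell with its up and left neighbour of
--     # the same color (no flood fill, no stack, no visited matrix)
--     label = {}
--     members = {}
--     for r in range(rows):
--         for c in range(cols):
--             v = input_grid[r][c]
--             if v == bg:
--                 continue
--             label[(r, c)] = (r, c)
--             members[(r, c)] = [(r, c)]
--             for nr, nc in ((r - 1, c), (r, c - 1)):
--                 if nr >= 0 and nc >= 0 and input_grid[nr][nc] == v:
--                     a = label[(r, c)]
--                     b = label[(nr, nc)]
--                     if a == b:
--                         continue
--                     if len(members[a]) > len(members[b]):
--                         a, b = b, a
--                     for cell in members[a]: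
--                         label[cell] = b
--                     members[b].extend(members[a])
--                     del members[a]
--
--     out = [row[:] for row in input_grid]
--     for comp in members.values():
--         mr = min(p[0] for p in comp)
--         mc = min(p[1] for p in comp)
--         for pr, pc in comp:
--             if (pr - mr) % 2 == 1 and (pc - mc) % 2 == 1:
--                 out[pr][pc] = bg
--     return out
-- ===== Notes on version B (the rewrite author's own statement) =====
-- stated objective: alternative
-- what changed: The per-seed DFS-stack flood fill with a visited matrix is replaced by a union-find (weighted quick-find) over grid cells: one raster pass unions every non-background cell with its same-color up and left neighbour, component lists are the union-find member buckets, and holes are punched into a fresh copy of the grid; the background is found with a plain dict and a first-max scan instead of Counter.most_common.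
import Mathlib
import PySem

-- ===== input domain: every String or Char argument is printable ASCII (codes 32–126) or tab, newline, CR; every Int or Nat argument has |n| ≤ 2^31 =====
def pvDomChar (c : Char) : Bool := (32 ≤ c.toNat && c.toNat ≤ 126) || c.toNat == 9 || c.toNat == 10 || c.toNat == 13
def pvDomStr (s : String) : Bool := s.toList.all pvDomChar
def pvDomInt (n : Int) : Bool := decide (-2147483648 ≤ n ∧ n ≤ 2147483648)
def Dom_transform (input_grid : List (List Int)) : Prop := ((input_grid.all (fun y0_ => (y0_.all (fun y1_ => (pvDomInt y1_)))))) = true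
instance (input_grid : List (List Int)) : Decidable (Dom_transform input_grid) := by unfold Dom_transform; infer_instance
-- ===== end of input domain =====

-- B replaces the per-seed DFS-stack flood fill (visited matrix, explicit stack) by a union-find
-- (weighted quick-find) over grid cells: one raster pass unions each non-background cell with its
-- same-color up and left neighbour, components are the member buckets, and Counter.most_common is
-- replaced by a dict + first-max scan. Neither program mutates its argument.

-- ===== PORT A =====
-- grid[r][c] (both programs read it only behind a 0 ≤ · < len bounds check, where pyGetD is exact)
def pvVal (g : List (List Int)) (r c : Int) : Int :=
  PySem.List.pyGetD (PySem.List.pyGetD g r []) c 0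

-- the literal delta list [(-1,0),(1,0),(0,-1),(0,1)] of A
def pvDeltas : List (Int × Int) := [(-1, 0), (1, 0), (0, -1), (0, 1)]

-- visited[r][c]; accesses are bounds-checked in the Python, where this is exact
-- (default `true` outside the matrix, so an out-of-shape read never counts as unvisited)
def pvVisGet (vis : List (List Bool)) (r c : Int) : Bool :=
  (vis.getD r.toNat []).getD c.toNat true

-- visited[r][c] = True
def pvVisSet (vis : List (List Bool)) (r c : Int) : List (List Bool) :=
  vis.set r.toNat ((vis.getD r.toNat []).set c.toNat true)

-- number of False entries of the visited matrix (termination measure only)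
def pvUnvis (vis : List (List Bool)) : Nat := (vis.map (fun row => row.count false)).sum

theorem pvCountFalseSet (row : List Bool) (j : Nat) (h : row.getD j true = false) :
    (row.set j true).count false + 1 = row.count false := by
  induction row generalizing j with
  | nil => simp at h
  | cons b t ih =>
    cases j with
    | zero =>
      simp only [List.getD_cons_zero] at h
      simp [h]
    | succ j =>
      simp only [List.getD_cons_succ] at h
      have := ih j h
      simp only [List.set_cons_succ, List.count_cons]
      omega

theorem pvUnvisSet (vis : List (List Bool)) (r c : Int)
    (h : pvVisGet vis r c = false) : pvUnvis (pvVisSet vis r c) + 1 = pvUnvis vis := by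
  unfold pvVisGet at h
  unfold pvVisSet pvUnvis
  induction vis generalizing r with
  | nil => simp at h
  | cons row t ih =>
    rcases Nat.eq_zero_or_pos r.toNat with h0 | hpos
    · simp only [h0, List.getD_cons_zero] at h
      have hc := pvCountFalseSet row c.toNat h
      simp only [h0, List.set_cons_zero, List.getD_cons_zero, List.map_cons, List.sum_cons]
      omega
    · obtain ⟨n, hn⟩ : ∃ n, r.toNat = n + 1 := ⟨r.toNat - 1, by omega⟩
      simp only [hn, List.getD_cons_succ] at h
      have := ih ((n : Int)) (by simpa using h)
      simp only [Int.toNat_natCast] at this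
      simp only [hn, List.getD_cons_succ, List.set_cons_succ, List.map_cons, List.sum_cons]
      omega

-- one neighbour probe of A's inner `for dr, dc in [...]` loop
def pvStep1 (g : List (List Int)) (rows cols color : Int) (p : Int × Int)
    (vs : List (List Bool) × List (Int × Int)) (d : Int × Int) :
    List (List Bool) × List (Int × Int) :=
  if 0 ≤ p.1 + d.1 ∧ p.1 + d.1 < rows ∧ 0 ≤ p.2 + d.2 ∧ p.2 + d.2 < cols ∧
      pvVisGet vs.1 (p.1 + d.1) (p.2 + d.2) = false ∧ pvVal g (p.1 + d.1) (p.2 + d.2) = color then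
    (pvVisSet vs.1 (p.1 + d.1) (p.2 + d.2), (p.1 + d.1, p.2 + d.2) :: vs.2)
  else vs

theorem pvStep1Measure (g : List (List Int)) (rows cols color : Int) (p d : Int × Int)
    (vs : List (List Bool) × List (Int × Int)) :
    2 * pvUnvis (pvStep1 g rows cols color p vs d).1 + (pvStep1 g rows cols color p vs d).2.length
      ≤ 2 * pvUnvis vs.1 + vs.2.length := by
  unfold pvStep1
  split
  · rename_i hc
    have := pvUnvisSet vs.1 (p.1 + d.1) (p.2 + d.2) hc.2.2.2.2.1
    simp only [List.length_cons]
    omega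
  · exact le_refl _

theorem pvFoldMeasure (g : List (List Int)) (rows cols color : Int) (p : Int × Int)
    (ds : List (Int × Int)) (vs : List (List Bool) × List (Int × Int)) :
    2 * pvUnvis (ds.foldl (pvStep1 g rows cols color p) vs).1 +
      (ds.foldl (pvStep1 g rows cols color p) vs).2.length
      ≤ 2 * pvUnvis vs.1 + vs.2.length := by
  induction ds generalizing vs with
  | nil => exact le_refl _
  | cons d t ih =>
    simp only [List.foldl_cons]
    exact le_trans (ih _) (pvStep1Measure g rows cols color p d vs)

-- the whole `for dr, dc in [...]` loop of one DFS iteration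
def pvProbe (g : List (List Int)) (rows cols color : Int) (p : Int × Int)
    (vis : List (List Bool)) (rest : List (Int × Int)) :
    List (List Bool) × List (Int × Int) :=
  pvDeltas.foldl (pvStep1 g rows cols color p) (vis, rest)

-- A's `while stack:` DFS loop (stack top kept at the list head; Python pops/pushes at the tail,
-- the same cells in the same relative order)
def pvDfs (g : List (List Int)) (rows cols color : Int) (vis : List (List Bool))
    (stack comp : List (Int × Int)) : List (Int × Int) × List (List Bool) :=
  match stack with
  | [] => (comp, vis)
  | p :: rest =>
    pvDfs g rows cols color (pvProbe g rows cols color p vis rest).1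
      (pvProbe g rows cols color p vis rest).2 (comp ++ [p])
termination_by 2 * pvUnvis vis + stack.length
decreasing_by
  have h := pvFoldMeasure g rows cols color p pvDeltas (vis, rest)
  dsimp only at h
  unfold pvProbe
  simp only [List.length_cons]
  omega

-- min(r for r, c in component) / min(c for r, c in component); components are never empty
def pvMinFst (comp : List (Int × Int)) : Int :=
  (PySem.List.min? (comp.map (fun p => p.1)) (fun x => x)).getD 0
def pvMinSnd (comp : List (Int × Int)) : Int :=
  (PySem.List.min? (comp.map (fun p => p.2)) (fun x => x)).getD 0

-- grid[r][c] = v (indices are non-negative and in range at every call site)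
def pvSet2 (gr : List (List Int)) (r c : Int) (v : Int) : List (List Int) :=
  gr.set r.toNat ((gr.getD r.toNat []).set c.toNat v)

-- A's hole-punching loop for one object
def pvPunch (bg : Int) (gr : List (List Int)) (obj : Int × List (Int × Int)) :
    List (List Int) :=
  let minr := pvMinFst obj.2
  let minc := pvMinSnd obj.2
  obj.2.foldl (fun gr p =>
    if PySem.Int.mod (p.1 - minr) 2 = 1 ∧ PySem.Int.mod (p.2 - minc) 2 = 1 then
      pvSet2 gr p.1 p.2 bg
    else gr) gr

-- A's component-collecting double loop
def pvScanA (g : List (List Int)) (rows cols bg : Int) :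
    List (List Bool) × List (Int × List (Int × Int)) :=
  (PySem.List.pyRange 0 rows 1).foldl (fun st r =>
    (PySem.List.pyRange 0 cols 1).foldl (fun st c =>
      if pvVal g r c ≠ bg ∧ pvVisGet st.1 r c = false then
        let color := pvVal g r c
        let res := pvDfs g rows cols color (pvVisSet st.1 r c) [(r, c)] []
        (res.2, st.2 ++ [(color, res.1)])
      else st) st)
    (List.replicate rows.toNat (List.replicate cols.toNat false), [])

def transform (input_grid : List (List Int)) : List (List Int) :=
  -- grid = [row[:] for row in input_grid] copies the values; value-equal to input_grid here
  let rows : Int := PySem.List.len input_grid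
  let cols : Int := PySem.List.len (PySem.List.pyGetD input_grid 0 [])
  -- Counter loop
  let counts := (PySem.List.pyRange 0 rows 1).foldl (fun d r =>
    (PySem.List.pyRange 0 cols 1).foldl (fun d c =>
      PySem.Dict.insert d (pvVal input_grid r c)
        (PySem.Dict.getD d (pvVal input_grid r c) 0 + 1 : Int)) d) PySem.Dict.empty
  -- most_common(1)[0][0]: stable sort by count, descending, first element (empty Counter raises → Pre_)
  let bg := (PySem.List.pyGetD
    (PySem.List.sorted (PySem.Dict.items counts) (fun kv => kv.2) true) 0
    ((0, 0) : Int × Int)).1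
  let objects := (pvScanA input_grid rows cols bg).2
  objects.foldl (pvPunch bg) input_grid

-- ===== PORT B =====
-- one quick-find union: relabel every member of class a to b, move a's member list onto b's
def pvUnion (st : PySem.Dict (Int × Int) (Int × Int) × PySem.Dict (Int × Int) (List (Int × Int)))
    (a b : Int × Int) :
    PySem.Dict (Int × Int) (Int × Int) × PySem.Dict (Int × Int) (List (Int × Int)) :=
  let la := PySem.Dict.getD st.2 a []
  (la.foldl (fun lab cell => PySem.Dict.insert lab cell b) st.1,
   PySem.Dict.erase (PySem.Dict.insert st.2 b (PySem.Dict.getD st.2 b [] ++ la)) a)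

-- the two candidates ((r-1,c),(r,c-1)) of Source B's neighbour tuple
def pvNbr2 (p : Int × Int) : List (Int × Int) :=
  [(p.1 - 1, p.2), (p.1, p.2 - 1)]

-- Source B's inner `for nr, nc in (...)` loop body: maybe union p's class with q's
def pvTryUnion (g : List (List Int)) (v : Int) (p : Int × Int)
    (st : PySem.Dict (Int × Int) (Int × Int) × PySem.Dict (Int × Int) (List (Int × Int)))
    (q : Int × Int) :
    PySem.Dict (Int × Int) (Int × Int) × PySem.Dict (Int × Int) (List (Int × Int)) :=
  if 0 ≤ q.1 ∧ 0 ≤ q.2 ∧ pvVal g q.1 q.2 = v then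
    let a := PySem.Dict.getD st.1 p p
    let b := PySem.Dict.getD st.1 q q
    if a = b then st
    else if (PySem.Dict.getD st.2 a []).length > (PySem.Dict.getD st.2 b []).length then
      pvUnion st b a
    else pvUnion st a b
  else st

-- processing of one grid cell of Source B's raster pass
def pvStepB (g : List (List Int)) (bg : Int)
    (st : PySem.Dict (Int × Int) (Int × Int) × PySem.Dict (Int × Int) (List (Int × Int)))
    (p : Int × Int) :
    PySem.Dict (Int × Int) (Int × Int) × PySem.Dict (Int × Int) (List (Int × Int)) :=
  -- v = input_grid[r][c]
  if pvVal g p.1 p.2 = bg then st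
  else
    (pvNbr2 p).foldl (pvTryUnion g (pvVal g p.1 p.2) p)
      (PySem.Dict.insert st.1 p p, PySem.Dict.insert st.2 p [p])

-- Source B's double loop over the grid
def pvScanB (g : List (List Int)) (rows cols bg : Int) :
    PySem.Dict (Int × Int) (Int × Int) × PySem.Dict (Int × Int) (List (Int × Int)) :=
  (PySem.List.pyRange 0 rows 1).foldl (fun st r =>
    (PySem.List.pyRange 0 cols 1).foldl (fun st c => pvStepB g bg st (r, c)) st)
    (PySem.Dict.empty, PySem.Dict.empty)

-- Source B's hole-punching loop for one component list
def pvPunchL (bg : Int) (gr : List (List Int)) (comp : List (Int × Int)) :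
    List (List Int) :=
  let minr := pvMinFst comp
  let minc := pvMinSnd comp
  comp.foldl (fun gr p =>
    if PySem.Int.mod (p.1 - minr) 2 = 1 ∧ PySem.Int.mod (p.2 - minc) 2 = 1 then
      pvSet2 gr p.1 p.2 bg
    else gr) gr

def transform_alt (input_grid : List (List Int)) : List (List Int) :=
  let rows : Int := PySem.List.len input_grid
  let cols : Int := PySem.List.len (PySem.List.pyGetD input_grid 0 [])
  -- counts = {}; counts[v] = counts.get(v, 0) + 1
  let counts := input_grid.foldl (fun d row =>
    row.foldl (fun d v => PySem.Dict.insert d v (PySem.Dict.getD d v 0 + 1 : Int)) d)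
    PySem.Dict.empty
  -- bg = max(counts, key=lambda v: counts[v]) (first maximal key; empty counts raises → Pre_)
  let bg := (PySem.List.max? (PySem.Dict.keys counts)
    (fun v => PySem.Dict.getD counts v 0)).getD 0
  let st := pvScanB input_grid rows cols bg
  -- out = [row[:] for row in input_grid]; then punch each members list
  (PySem.Dict.values st.2).foldl (pvPunchL bg) input_grid

-- ===== PRECONDITION & SPEC =====
-- Pre_ excludes the empty grid and a zero-width first row (A raises IndexError there) and, more
-- generally, ragged grids: when a later row is shorter A raises IndexError, and when a later row
-- is longer A returns a value but silently ignores the cells beyond the first row's width — a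
-- shape accident of A's `cols = len(grid[0])`; grids here are rectangular by contract.
def Pre_transform (input_grid : List (List Int)) : Prop :=
  input_grid ≠ [] ∧ 0 < (input_grid.headD []).length ∧
    ∀ row ∈ input_grid, row.length = (input_grid.headD []).length
instance (input_grid : List (List Int)) : Decidable (Pre_transform input_grid) := by
  unfold Pre_transform; infer_instance

def pvWitness_transform : List (List Int) := [[3, 3, 3], [3, 5, 5], [3, 5, 5]]

def Spec_transform (input_grid : List (List Int)) (out : List (List Int)) : Prop :=
  out = transform_alt input_grid
instance (input_grid : List (List Int)) (out : List (List Int)) :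
    Decidable (Spec_transform input_grid out) := by unfold Spec_transform; infer_instance

-- ===== CLAIM (what is proved, stated in full; the proofs are below) =====
def Claim_equal_transform : Prop := ∀ (input_grid : List (List Int)),
  Dom_transform input_grid → Pre_transform input_grid →
    Spec_transform input_grid (transform input_grid)

-- ===== LEMMAS AND PROOFS =====

-- a generic list-set/getD fact used throughout
theorem pvGetDSet {A : Type} (l : List A) (i j : Nat) (x d : A) :
    (l.set i x).getD j d = if i = j ∧ i < l.length then x else l.getD j d := by
  rw [List.getD_eq_getElem?_getD, List.getElem?_set]
  by_cases hij : i = j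
  · subst hij
    by_cases hl : i < l.length
    · simp [hl]
    · simp only [hl, if_false, if_true, and_false, List.getD_eq_getElem?_getD]
      rw [List.getElem?_eq_none (by omega)]
  · simp [hij, List.getD_eq_getElem?_getD]

-- ======== semantic layer: grid graph, reachability, scan order ========

def pvInB (rows cols : Int) (p : Int × Int) : Prop :=
  0 ≤ p.1 ∧ p.1 < rows ∧ 0 ≤ p.2 ∧ p.2 < cols

def pvAdj (g : List (List Int)) (rows cols bg : Int) (p q : Int × Int) : Prop :=
  pvInB rows cols p ∧ pvInB rows cols q ∧ pvVal g p.1 p.2 ≠ bg ∧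
  pvVal g q.1 q.2 = pvVal g p.1 p.2 ∧
  ((q.1 = p.1 - 1 ∧ q.2 = p.2) ∨ (q.1 = p.1 + 1 ∧ q.2 = p.2) ∨
   (q.1 = p.1 ∧ q.2 = p.2 - 1) ∨ (q.1 = p.1 ∧ q.2 = p.2 + 1))

def pvReach (g : List (List Int)) (rows cols bg : Int) (p q : Int × Int) : Prop :=
  Relation.ReflTransGen (pvAdj g rows cols bg) p q

def pvScanLE (a b : Int × Int) : Prop := a.1 < b.1 ∨ (a.1 = b.1 ∧ a.2 ≤ b.2)
def pvScanLT (a b : Int × Int) : Prop := a.1 < b.1 ∨ (a.1 = b.1 ∧ a.2 < b.2)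

def pvIsSeed (g : List (List Int)) (rows cols bg : Int) (s : Int × Int) : Prop :=
  pvInB rows cols s ∧ pvVal g s.1 s.2 ≠ bg ∧
    ∀ q, pvReach g rows cols bg s q → pvScanLE s q

def pvClassMin (g : List (List Int)) (rows cols bg : Int) (s : Int × Int) (mr mc : Int) : Prop :=
  (∃ x, pvReach g rows cols bg s x ∧ x.1 = mr) ∧
  (∀ x, pvReach g rows cols bg s x → mr ≤ x.1) ∧
  (∃ x, pvReach g rows cols bg s x ∧ x.2 = mc) ∧
  (∀ x, pvReach g rows cols bg s x → mc ≤ x.2)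

-- cells visited after scanning the prefix P of the row-major cell list
def pvVisP (g : List (List Int)) (rows cols bg : Int) (P : List (Int × Int)) (q : Int × Int) : Prop :=
  ∃ p ∈ P, pvInB rows cols p ∧ pvVal g p.1 p.2 ≠ bg ∧ pvReach g rows cols bg p q

-- the row-major list of all in-bounds cells
def pvCells (rows cols : Int) : List (Int × Int) :=
  (PySem.List.pyRange 0 rows 1).flatMap (fun r =>
    (PySem.List.pyRange 0 cols 1).map (fun c => (r, c)))

def pvShape {A : Type} (rows cols : Int) (m : List (List A)) : Prop :=
  m.length = rows.toNat ∧ ∀ row ∈ m, row.length = cols.toNat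

-- ======== small order/graph lemmas ========

theorem pvAdj_symm (g : List (List Int)) (rows cols bg : Int) (p q : Int × Int)
    (h : pvAdj g rows cols bg p q) : pvAdj g rows cols bg q p := by
  obtain ⟨hp, hq, hnb, hv, hd⟩ := h
  exact ⟨hq, hp, by rw [hv]; exact hnb, hv.symm, by omega⟩

theorem pvReach_val (g : List (List Int)) (rows cols bg : Int) (s q : Int × Int)
    (hs : pvInB rows cols s) (_hnb : pvVal g s.1 s.2 ≠ bg)
    (h : pvReach g rows cols bg s q) :
    pvInB rows cols q ∧ pvVal g q.1 q.2 = pvVal g s.1 s.2 := by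
  induction h with
  | refl => exact ⟨hs, rfl⟩
  | tail _ ha ih => exact ⟨ha.2.1, by rw [ha.2.2.2.1, ih.2]⟩

theorem pvReach_symm (g : List (List Int)) (rows cols bg : Int) (p q : Int × Int)
    (h : pvReach g rows cols bg p q) : pvReach g rows cols bg q p :=
  (Relation.ReflTransGen.symmetric (fun _ _ hab => pvAdj_symm g rows cols bg _ _ hab)) h

theorem pvClassMin_unique (g : List (List Int)) (rows cols bg : Int) (s : Int × Int)
    (mr mc mr' mc' : Int) (h : pvClassMin g rows cols bg s mr mc)
    (h' : pvClassMin g rows cols bg s mr' mc') : mr = mr' ∧ mc = mc' := by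
  obtain ⟨⟨x1, hx1, e1⟩, hlo, ⟨x2, hx2, e2⟩, hlo2⟩ := h
  obtain ⟨⟨y1, hy1, f1⟩, hlo', ⟨y2, hy2, f2⟩, hlo2'⟩ := h'
  have := hlo y1 hy1
  have := hlo' x1 hx1
  have := hlo2 y2 hy2
  have := hlo2' x2 hx2
  omega

-- the four neighbour candidates of a cell (proof-side only)
def pvNbrs (p : Int × Int) : List (Int × Int) :=
  [(p.1 - 1, p.2), (p.1 + 1, p.2), (p.1, p.2 - 1), (p.1, p.2 + 1)]

-- the four adjacency cases are exactly the four neighbour candidates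
theorem pvAdj_mem_nbrs (g : List (List Int)) (rows cols bg : Int) (p q : Int × Int)
    (h : pvAdj g rows cols bg p q) : q ∈ pvNbrs p := by
  obtain ⟨_, _, _, _, hd⟩ := h
  have : q = (p.1 - 1, p.2) ∨ q = (p.1 + 1, p.2) ∨ q = (p.1, p.2 - 1) ∨ q = (p.1, p.2 + 1) := by
    rcases hd with ⟨h1, h2⟩ | ⟨h1, h2⟩ | ⟨h1, h2⟩ | ⟨h1, h2⟩ <;>
      [exact Or.inl (Prod.ext h1 h2); exact Or.inr (Or.inl (Prod.ext h1 h2));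
       exact Or.inr (Or.inr (Or.inl (Prod.ext h1 h2)));
       exact Or.inr (Or.inr (Or.inr (Prod.ext h1 h2)))]
  simpa [pvNbrs] using this

theorem pvAdj_of_nbr (g : List (List Int)) (rows cols bg : Int) (p q : Int × Int)
    (hq : q ∈ pvNbrs p) (hp : pvInB rows cols p) (hqb : pvInB rows cols q)
    (hnb' : pvVal g p.1 p.2 ≠ bg) (hv : pvVal g q.1 q.2 = pvVal g p.1 p.2) :
    pvAdj g rows cols bg p q := by
  refine ⟨hp, hqb, hnb', hv, ?_⟩
  simp [pvNbrs] at hq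
  rcases hq with rfl | rfl | rfl | rfl <;> simp

-- p + d for d ∈ pvDeltas, as used by port A, is a neighbour and vice versa
theorem pvNbrs_eq_deltas (p : Int × Int) :
    pvNbrs p = pvDeltas.map (fun d => (p.1 + d.1, p.2 + d.2)) := by
  simp [pvNbrs, pvDeltas]
  omega

-- ======== getD / set matrix lemmas ========

theorem pvVal_eq_getD (g : List (List Int)) (r c : Int) (h1 : 0 ≤ r) (h2 : 0 ≤ c) :
    pvVal g r c = (g.getD r.toNat []).getD c.toNat 0 := by
  unfold pvVal
  rw [PySem.List.pyGetD_of_nonneg _ _ h1, PySem.List.pyGetD_of_nonneg _ _ h2]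

theorem pvMatGetSet {A : Type} (m : List (List A)) (rows cols : Int)
    (hs : pvShape rows cols m) (p q : Int × Int) (hp : pvInB rows cols p)
    (hq : pvInB rows cols q) (v d0 : A) :
    ((m.set p.1.toNat ((m.getD p.1.toNat []).set p.2.toNat v)).getD q.1.toNat []).getD q.2.toNat d0
      = if q = p then v else (m.getD q.1.toNat []).getD q.2.toNat d0 := by
  obtain ⟨hp1, hp2, hp3, hp4⟩ := hp
  obtain ⟨hq1, hq2, hq3, hq4⟩ := hq
  have hplen : p.1.toNat < m.length := by rw [hs.1]; omega
  have hrow : ∀ i : Nat, i < m.length → (m.getD i []).length = cols.toNat := by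
    intro i hi
    rw [List.getD_eq_getElem _ _ hi]
    exact hs.2 _ (List.getElem_mem hi)
  rw [pvGetDSet]
  by_cases hr : p.1.toNat = q.1.toNat
  · rw [if_pos ⟨hr, hplen⟩, pvGetDSet]
    have hrq : m.getD p.1.toNat [] = m.getD q.1.toNat [] := by rw [hr]
    have hlen2 : p.2.toNat < (m.getD p.1.toNat []).length := by rw [hrow _ hplen]; omega
    by_cases hc : p.2.toNat = q.2.toNat
    · rw [if_pos ⟨hc, hlen2⟩, if_pos (show q = p from Prod.ext (by omega) (by omega))]
    · rw [if_neg (fun hcon => hc hcon.1),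
        if_neg (show ¬ q = p from fun hcon => hc (by rw [hcon])), hrq]
  · rw [if_neg (fun hcon => hr hcon.1),
      if_neg (show ¬ q = p from fun hcon => hr (by rw [hcon]))]

theorem pvValSet2 (gr : List (List Int)) (rows cols : Int) (hs : pvShape rows cols gr)
    (a b : Int) (q : Int × Int) (hp : pvInB rows cols (a, b)) (hq : pvInB rows cols q) (v : Int) :
    pvVal (pvSet2 gr a b v) q.1 q.2 = if q = (a, b) then v else pvVal gr q.1 q.2 := by
  rw [pvVal_eq_getD _ _ _ hq.1 hq.2.2.1, pvVal_eq_getD _ _ _ hq.1 hq.2.2.1]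
  exact pvMatGetSet gr rows cols hs (a, b) q hp hq v 0

theorem pvSetRow_shape {A : Type} (m : List (List A)) (rows cols : Int)
    (hs : pvShape rows cols m) (r c : Int) (v : A) :
    pvShape rows cols (m.set r.toNat ((m.getD r.toNat []).set c.toNat v)) := by
  by_cases hl : r.toNat < m.length
  · refine ⟨by rw [List.length_set]; exact hs.1, ?_⟩
    intro row hrow
    rcases List.mem_or_eq_of_mem_set hrow with h | h
    · exact hs.2 row h
    · subst h
      rw [List.length_set, List.getD_eq_getElem _ _ hl]
      exact hs.2 _ (List.getElem_mem hl)
  · rw [List.set_eq_of_length_le (by omega)]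
    exact hs

theorem pvSet2_shape (gr : List (List Int)) (rows cols : Int) (hs : pvShape rows cols gr)
    (r c : Int) (v : Int) : pvShape rows cols (pvSet2 gr r c v) :=
  pvSetRow_shape gr rows cols hs r c v

theorem pvVisGetSet (vis : List (List Bool)) (rows cols : Int) (hs : pvShape rows cols vis)
    (a b : Int) (q : Int × Int) (hp : pvInB rows cols (a, b)) (hq : pvInB rows cols q) :
    pvVisGet (pvVisSet vis a b) q.1 q.2 = if q = (a, b) then true else pvVisGet vis q.1 q.2 := by
  unfold pvVisGet pvVisSet
  exact pvMatGetSet vis rows cols hs (a, b) q hp hq true true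

theorem pvVisSet_shape (vis : List (List Bool)) (rows cols : Int) (hs : pvShape rows cols vis)
    (r c : Int) : pvShape rows cols (pvVisSet vis r c) := by
  exact pvSetRow_shape vis rows cols hs r c true

theorem pvVisGet_mono (vis : List (List Bool)) (r c r' c' : Int)
    (h : pvVisGet vis r' c' = true) : pvVisGet (pvVisSet vis r c) r' c' = true := by
  unfold pvVisGet pvVisSet at *
  rw [pvGetDSet]
  by_cases h1 : r.toNat = r'.toNat ∧ r.toNat < vis.length
  · rw [if_pos h1, pvGetDSet]
    rw [← h1.1] at h
    by_cases h2 : c.toNat = c'.toNat ∧ c.toNat < (vis.getD r.toNat []).length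
    · rw [if_pos h2]
    · rw [if_neg h2]
      exact h
  · rw [if_neg h1]
    exact h

theorem pvVisGet_replicate (rows cols : Int) (q : Int × Int) (hq : pvInB rows cols q) :
    pvVisGet (List.replicate rows.toNat (List.replicate cols.toNat false)) q.1 q.2 = false := by
  obtain ⟨h1, h2, h3, h4⟩ := hq
  unfold pvVisGet
  rw [List.getD_replicate _ (by omega : q.1.toNat < rows.toNat)]
  rw [List.getD_replicate _ (by omega : q.2.toNat < cols.toNat)]

theorem pvReplicate_shape (rows cols : Int) :
    pvShape rows cols (List.replicate rows.toNat (List.replicate cols.toNat false)) := by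
  refine ⟨by simp, ?_⟩
  intro row hrow
  rw [List.eq_of_mem_replicate hrow]
  simp

-- ======== pvCells: membership, order, prefix characterization ========

theorem pvCells_mem (rows cols : Int) (q : Int × Int) :
    q ∈ pvCells rows cols ↔ pvInB rows cols q := by
  unfold pvCells pvInB
  simp only [List.mem_flatMap, List.mem_map, PySem.List.mem_pyRange_one]
  constructor
  · rintro ⟨r, hr, c, hc, rfl⟩
    exact ⟨hr.1, hr.2, hc.1, hc.2⟩
  · rintro ⟨h1, h2, h3, h4⟩
    exact ⟨q.1, ⟨h1, h2⟩, q.2, ⟨h3, h4⟩, rfl⟩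

theorem pvPairwiseFlatMap {A B : Type} (l : List A) (f : A → List B)
    (R : A → A → Prop) (S : B → B → Prop) (hl : l.Pairwise R)
    (hf : ∀ a ∈ l, (f a).Pairwise S)
    (hx : ∀ a b, R a b → ∀ x ∈ f a, ∀ y ∈ f b, S x y) :
    (l.flatMap f).Pairwise S := by
  induction l with
  | nil => simp
  | cons a t ih =>
    rw [List.flatMap_cons, List.pairwise_append]
    refine ⟨hf a List.mem_cons_self, ih hl.of_cons (fun b hb => hf b (List.mem_cons_of_mem _ hb)), ?_⟩
    intro x hxa y hy
    rw [List.mem_flatMap] at hy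
    obtain ⟨b, hb, hyb⟩ := hy
    exact hx a b ((List.pairwise_cons.mp hl).1 b hb) x hxa y hyb

theorem pvCells_pairwise (rows cols : Int) : (pvCells rows cols).Pairwise pvScanLT := by
  unfold pvCells
  apply pvPairwiseFlatMap _ _ (· < ·)
  · exact PySem.List.pairwise_lt_pyRange_one 0 rows
  · intro r _
    rw [List.pairwise_map]
    exact (PySem.List.pairwise_lt_pyRange_one 0 cols).imp (fun h => Or.inr ⟨rfl, h⟩)
  · intro a b hab x hxa y hyb
    simp only [List.mem_map] at hxa hyb
    obtain ⟨c1, _, rfl⟩ := hxa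
    obtain ⟨c2, _, rfl⟩ := hyb
    exact Or.inl hab

theorem pvCells_prefix_char (rows cols : Int) (P rest : List (Int × Int)) (p : Int × Int)
    (h : pvCells rows cols = P ++ p :: rest) (q : Int × Int) :
    q ∈ P ↔ pvInB rows cols q ∧ pvScanLT q p := by
  have hpw := pvCells_pairwise rows cols
  rw [h] at hpw
  constructor
  · intro hq
    have hm : q ∈ pvCells rows cols := by rw [h]; exact List.mem_append_left _ hq
    refine ⟨(pvCells_mem rows cols q).mp hm, ?_⟩
    have := (List.pairwise_append.mp hpw).2.2 q hq p List.mem_cons_self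
    exact this
  · rintro ⟨hin, hlt⟩
    have hm : q ∈ P ++ p :: rest := by rw [← h]; exact (pvCells_mem rows cols q).mpr hin
    rcases List.mem_append.mp hm with hq | hq
    · exact hq
    · exfalso
      rcases List.mem_cons.mp hq with rfl | hq
      · unfold pvScanLT at hlt; omega
      · have hpq := (List.pairwise_cons.mp (List.pairwise_append.mp hpw).2.1).1 q hq
        unfold pvScanLT at hlt hpq
        omega

theorem pvCells_not_mem_prefix (rows cols : Int) (P rest : List (Int × Int)) (p : Int × Int)
    (h : pvCells rows cols = P ++ p :: rest) : p ∉ P := by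
  intro hp
  have := (pvCells_prefix_char rows cols P rest p h p).mp hp
  unfold pvScanLT at this
  omega

-- ======== port A: the DFS loop computes exactly the reachability class ========

-- the invariant carried through the inner neighbour-probing fold of pvDfs
def pvDfsPair (g : List (List Int)) (rows cols bg color : Int) (V0 : Int × Int → Prop)
    (seed : Int × Int) (comp : List (Int × Int)) (p : Int × Int)
    (vs : List (List Bool) × List (Int × Int)) : Prop :=
  pvShape rows cols vs.1 ∧
  (∀ q, pvInB rows cols q →
    (pvVisGet vs.1 q.1 q.2 = true ↔ V0 q ∨ q ∈ vs.2 ∨ q ∈ comp ∨ q = p)) ∧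
  (∀ q ∈ vs.2, pvInB rows cols q ∧ pvVal g q.1 q.2 = color ∧ pvReach g rows cols bg seed q) ∧
  (∀ q ∈ comp, ∀ x, pvAdj g rows cols bg q x → pvVisGet vs.1 x.1 x.2 = true)

theorem pvStep1_pair (g : List (List Int)) (rows cols bg color : Int) (V0 : Int × Int → Prop)
    (seed : Int × Int) (comp : List (Int × Int)) (p d : Int × Int)
    (vs : List (List Bool) × List (Int × Int))
    (hcol : color ≠ bg)
    (hp : pvInB rows cols p ∧ pvVal g p.1 p.2 = color ∧ pvReach g rows cols bg seed p)
    (hd : d ∈ pvDeltas)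
    (hinv : pvDfsPair g rows cols bg color V0 seed comp p vs) :
    pvDfsPair g rows cols bg color V0 seed comp p (pvStep1 g rows cols color p vs d) := by
  obtain ⟨hs, hv, hst, hcp⟩ := hinv
  unfold pvStep1
  split
  case isTrue hc =>
    obtain ⟨hb1, hb2, hb3, hb4, hvf, hval⟩ := hc
    have hq0 : pvInB rows cols (p.1 + d.1, p.2 + d.2) := ⟨hb1, hb2, hb3, hb4⟩
    refine ⟨pvVisSet_shape _ _ _ hs _ _, ?_, ?_, ?_⟩
    · intro q hq
      rw [pvVisGetSet vs.1 rows cols hs (p.1 + d.1) (p.2 + d.2) q hq0 hq]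
      by_cases hqq : q = ((p.1 + d.1 : Int), (p.2 + d.2 : Int))
      · rw [if_pos hqq]
        simp only [List.mem_cons, hqq]
        tauto
      · rw [if_neg hqq, hv q hq]
        simp only [List.mem_cons, hqq, false_or]
    · intro q hq
      rcases List.mem_cons.mp hq with rfl | hq
      · refine ⟨hq0, hval, Relation.ReflTransGen.tail hp.2.2 ?_⟩
        apply pvAdj_of_nbr g rows cols bg p _ ?_ hp.1 hq0
          (by rw [hp.2.1]; exact hcol) (by rw [hval, hp.2.1])
        rw [pvNbrs_eq_deltas]
        exact List.mem_map.mpr ⟨d, hd, rfl⟩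
      · exact hst q hq
    · intro q hq x hx
      exact pvVisGet_mono _ _ _ _ _ (hcp q hq x hx)
  case isFalse => exact ⟨hs, hv, hst, hcp⟩

theorem pvStep1_visMono (g : List (List Int)) (rows cols color : Int) (p d : Int × Int)
    (vs : List (List Bool) × List (Int × Int)) (x : Int × Int)
    (h : pvVisGet vs.1 x.1 x.2 = true) :
    pvVisGet (pvStep1 g rows cols color p vs d).1 x.1 x.2 = true := by
  unfold pvStep1
  split
  · exact pvVisGet_mono _ _ _ _ _ h
  · exact h

theorem pvStep1_stackMono (g : List (List Int)) (rows cols color : Int) (p d : Int × Int)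
    (vs : List (List Bool) × List (Int × Int)) (x : Int × Int) (h : x ∈ vs.2) :
    x ∈ (pvStep1 g rows cols color p vs d).2 := by
  unfold pvStep1
  split
  · exact List.mem_cons_of_mem _ h
  · exact h

theorem pvFold_visMono (g : List (List Int)) (rows cols color : Int) (p : Int × Int)
    (ds : List (Int × Int)) (vs : List (List Bool) × List (Int × Int)) (x : Int × Int)
    (h : pvVisGet vs.1 x.1 x.2 = true) :
    pvVisGet ((ds.foldl (pvStep1 g rows cols color p) vs)).1 x.1 x.2 = true := by
  induction ds generalizing vs with
  | nil => exact h
  | cons d t ih =>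
    exact ih _ (pvStep1_visMono g rows cols color p d vs x h)

theorem pvFold_stackMono (g : List (List Int)) (rows cols color : Int) (p : Int × Int)
    (ds : List (Int × Int)) (vs : List (List Bool) × List (Int × Int)) (x : Int × Int)
    (h : x ∈ vs.2) : x ∈ ((ds.foldl (pvStep1 g rows cols color p) vs)).2 := by
  induction ds generalizing vs with
  | nil => exact h
  | cons d t ih =>
    exact ih _ (pvStep1_stackMono g rows cols color p d vs x h)

theorem pvFold_pair (g : List (List Int)) (rows cols bg color : Int) (V0 : Int × Int → Prop)
    (seed : Int × Int) (comp : List (Int × Int)) (p : Int × Int)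
    (ds : List (Int × Int)) (vs : List (List Bool) × List (Int × Int))
    (hcol : color ≠ bg)
    (hp : pvInB rows cols p ∧ pvVal g p.1 p.2 = color ∧ pvReach g rows cols bg seed p)
    (hds : ∀ d ∈ ds, d ∈ pvDeltas)
    (hinv : pvDfsPair g rows cols bg color V0 seed comp p vs) :
    pvDfsPair g rows cols bg color V0 seed comp p (ds.foldl (pvStep1 g rows cols color p) vs) := by
  induction ds generalizing vs with
  | nil => exact hinv
  | cons d t ih =>
    exact ih _ (fun d' hd' => hds d' (List.mem_cons_of_mem _ hd'))
      (pvStep1_pair g rows cols bg color V0 seed comp p d vs hcol hp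
        (hds d List.mem_cons_self) hinv)

theorem pvFold_covers (g : List (List Int)) (rows cols bg color : Int) (V0 : Int × Int → Prop)
    (seed : Int × Int) (comp : List (Int × Int)) (p : Int × Int)
    (ds : List (Int × Int)) (vs : List (List Bool) × List (Int × Int))
    (hcol : color ≠ bg)
    (hp : pvInB rows cols p ∧ pvVal g p.1 p.2 = color ∧ pvReach g rows cols bg seed p)
    (hds : ∀ d ∈ ds, d ∈ pvDeltas)
    (hinv : pvDfsPair g rows cols bg color V0 seed comp p vs) :
    ∀ d ∈ ds, pvAdj g rows cols bg p (p.1 + d.1, p.2 + d.2) →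
      pvVisGet ((ds.foldl (pvStep1 g rows cols color p) vs)).1 (p.1 + d.1) (p.2 + d.2) = true := by
  induction ds generalizing vs with
  | nil => intro d hd; simp at hd
  | cons d0 t ih =>
    intro d hd hadj
    rcases List.mem_cons.mp hd with rfl | hd
    · simp only [List.foldl_cons]
      refine pvFold_visMono g rows cols color p t _ (p.1 + d.1, p.2 + d.2) ?_
      obtain ⟨hs, hv, hst, hcp⟩ := hinv
      unfold pvStep1
      split
      case isTrue hc =>
        have hq0 : pvInB rows cols (p.1 + d.1, p.2 + d.2) := hadj.2.1
        have := pvVisGetSet vs.1 rows cols hs (p.1 + d.1) (p.2 + d.2)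
          (p.1 + d.1, p.2 + d.2) hq0 hq0
        simpa using this
      case isFalse hc =>
        by_cases hvis : pvVisGet vs.1 (p.1 + d.1) (p.2 + d.2) = true
        · exact hvis
        · exfalso
          apply hc
          obtain ⟨hb1, hb2, hb3, hb4⟩ := hadj.2.1
          refine ⟨hb1, hb2, hb3, hb4, by simpa using hvis, ?_⟩
          rw [show pvVal g (p.1 + d.1) (p.2 + d.2) =
            pvVal g ((p.1 + d.1 : Int), (p.2 + d.2 : Int)).1 ((p.1 + d.1 : Int), (p.2 + d.2 : Int)).2 from rfl,
            hadj.2.2.2.1, hp.2.1]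
    · simp only [List.foldl_cons]
      exact ih _ (fun d' hd' => hds d' (List.mem_cons_of_mem _ hd'))
        (pvStep1_pair g rows cols bg color V0 seed comp p d0 vs hcol hp
          (hds d0 List.mem_cons_self) hinv) d hd hadj

theorem pvDfs_master (g : List (List Int)) (rows cols bg color : Int) (V0 : Int × Int → Prop)
    (seed : Int × Int) (hcol : color ≠ bg) :
    ∀ vis stack comp,
    pvShape rows cols vis →
    (∀ q, pvInB rows cols q → (pvVisGet vis q.1 q.2 = true ↔ V0 q ∨ q ∈ stack ∨ q ∈ comp)) →
    (∀ q, q ∈ stack ∨ q ∈ comp →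
      pvInB rows cols q ∧ pvVal g q.1 q.2 = color ∧ pvReach g rows cols bg seed q) →
    (∀ q ∈ comp, ∀ x, pvAdj g rows cols bg q x → pvVisGet vis x.1 x.2 = true) →
    pvShape rows cols (pvDfs g rows cols color vis stack comp).2 ∧
    (∀ q, pvInB rows cols q → (pvVisGet (pvDfs g rows cols color vis stack comp).2 q.1 q.2 = true ↔
      V0 q ∨ q ∈ (pvDfs g rows cols color vis stack comp).1)) ∧
    (∀ q ∈ (pvDfs g rows cols color vis stack comp).1,
      pvInB rows cols q ∧ pvVal g q.1 q.2 = color ∧ pvReach g rows cols bg seed q) ∧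
    (∀ q ∈ (pvDfs g rows cols color vis stack comp).1, ∀ x, pvAdj g rows cols bg q x →
      pvVisGet (pvDfs g rows cols color vis stack comp).2 x.1 x.2 = true) ∧
    (∀ q, q ∈ stack ∨ q ∈ comp → q ∈ (pvDfs g rows cols color vis stack comp).1) := by
  intro vis stack comp
  fun_induction pvDfs g rows cols color vis stack comp with
  | case1 vis comp =>
    intro h1 h2 h3 h4
    refine ⟨h1, ?_, ?_, h4, ?_⟩
    · intro q hq
      rw [h2 q hq]
      simp
    · intro q hq
      exact h3 q (Or.inr hq)
    · intro q hq
      rcases hq with hq | hq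
      · simp at hq
      · exact hq
  | case2 vis comp p rest ih =>
    intro h1 h2 h3 h4
    have hp := h3 p (Or.inl List.mem_cons_self)
    have hpair0 : pvDfsPair g rows cols bg color V0 seed comp p (vis, rest) := by
      refine ⟨h1, ?_, ?_, h4⟩
      · intro q hq
        rw [h2 q hq]
        simp only [List.mem_cons]
        tauto
      · intro q hq
        exact h3 q (Or.inl (List.mem_cons_of_mem _ hq))
    have hfold := pvFold_pair g rows cols bg color V0 seed comp p pvDeltas (vis, rest)
      hcol hp (fun d hd => hd) hpair0
    have hF : pvDeltas.foldl (pvStep1 g rows cols color p) (vis, rest) =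
        pvProbe g rows cols color p vis rest := rfl
    rw [hF] at hfold
    obtain ⟨hs', hv', hst', hcp'⟩ := hfold
    have hmain := ih hs' ?A ?B ?C
    case A =>
      intro q hq
      rw [hv' q hq]
      simp only [List.mem_append, List.mem_singleton]
    case B =>
      intro q hq
      rcases hq with hq | hq
      · exact hst' q hq
      · rcases List.mem_append.mp hq with hq | hq
        · exact h3 q (Or.inr hq)
        · rw [List.mem_singleton.mp hq]
          exact hp
    case C =>
      intro q hq x hx
      rcases List.mem_append.mp hq with hq | hq
      · have := h4 q hq x hx
        have := pvFold_visMono g rows cols color p pvDeltas (vis, rest) x this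
        rw [hF] at this
        exact this
      · rw [List.mem_singleton.mp hq] at hx
        have hxn := pvAdj_mem_nbrs g rows cols bg p x hx
        rw [pvNbrs_eq_deltas] at hxn
        obtain ⟨d, hd, hdx⟩ := List.mem_map.mp hxn
        have := pvFold_covers g rows cols bg color V0 seed comp p pvDeltas (vis, rest)
          hcol hp (fun d hd => hd) hpair0 d hd (by rw [hdx]; exact hx)
        rw [hF] at this
        cases hdx
        exact this
    · obtain ⟨e1, e2, e3, e4, e5⟩ := hmain
      refine ⟨e1, e2, e3, e4, ?_⟩
      intro q hq
      rcases hq with hq | hq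
      · rcases List.mem_cons.mp hq with rfl | hq
        · exact e5 q (Or.inr (List.mem_append_right _ List.mem_cons_self))
        · refine e5 q (Or.inl ?_)
          have : q ∈ ((vis, rest) : List (List Bool) × List (Int × Int)).2 := hq
          have := pvFold_stackMono g rows cols color p pvDeltas (vis, rest) q this
          rw [hF] at this
          exact this
      · exact e5 q (Or.inr (List.mem_append_left _ hq))

theorem pvDfs_component (g : List (List Int)) (rows cols bg : Int) (seed : Int × Int)
    (vis : List (List Bool)) (V0 : Int × Int → Prop)
    (hshape : pvShape rows cols vis) (hseed : pvInB rows cols seed)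
    (hnb : pvVal g seed.1 seed.2 ≠ bg)
    (hvis : ∀ q, pvInB rows cols q → (pvVisGet vis q.1 q.2 = true ↔ V0 q))
    (havoid : ∀ q, pvReach g rows cols bg seed q → ¬ V0 q) :
    (∀ q, q ∈ (pvDfs g rows cols (pvVal g seed.1 seed.2)
        (pvVisSet vis seed.1 seed.2) [seed] []).1 ↔ pvReach g rows cols bg seed q) ∧
    (∀ q, pvInB rows cols q →
      (pvVisGet (pvDfs g rows cols (pvVal g seed.1 seed.2)
        (pvVisSet vis seed.1 seed.2) [seed] []).2 q.1 q.2 = true ↔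
        V0 q ∨ pvReach g rows cols bg seed q)) ∧
    pvShape rows cols (pvDfs g rows cols (pvVal g seed.1 seed.2)
      (pvVisSet vis seed.1 seed.2) [seed] []).2 := by
  have h2' : ∀ q, pvInB rows cols q → (pvVisGet (pvVisSet vis seed.1 seed.2) q.1 q.2 = true ↔
      V0 q ∨ q ∈ [seed] ∨ q ∈ ([] : List (Int × Int))) := by
    intro q hq
    rw [pvVisGetSet vis rows cols hshape seed.1 seed.2 q hseed hq]
    by_cases hqs : q = seed
    · subst hqs
      simp
    · rw [if_neg (by simpa using hqs), hvis q hq]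
      simp only [List.mem_singleton, List.not_mem_nil, or_false]
      constructor
      · exact Or.inl
      · rintro (h | h)
        · exact h
        · exact absurd h hqs
  have h3' : ∀ q, q ∈ [seed] ∨ q ∈ ([] : List (Int × Int)) →
      pvInB rows cols q ∧ pvVal g q.1 q.2 = pvVal g seed.1 seed.2 ∧
        pvReach g rows cols bg seed q := by
    intro q hq
    have hqs : q = seed := by
      rcases hq with hq | hq
      · exact List.mem_singleton.mp hq
      · simp at hq
    subst hqs
    exact ⟨hseed, rfl, Relation.ReflTransGen.refl⟩
  have h4' : ∀ q ∈ ([] : List (Int × Int)), ∀ x, pvAdj g rows cols bg q x →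
      pvVisGet (pvVisSet vis seed.1 seed.2) x.1 x.2 = true := by
    intro q hq
    simp at hq
  obtain ⟨e1, e2, e3, e4, e5⟩ := pvDfs_master g rows cols bg (pvVal g seed.1 seed.2) V0 seed hnb
    (pvVisSet vis seed.1 seed.2) [seed] []
    (pvVisSet_shape vis rows cols hshape seed.1 seed.2) h2' h3' h4'
  have hC1 : ∀ q, q ∈ (pvDfs g rows cols (pvVal g seed.1 seed.2)
      (pvVisSet vis seed.1 seed.2) [seed] []).1 ↔ pvReach g rows cols bg seed q := by
    intro q
    constructor
    · intro hq
      exact (e3 q hq).2.2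
    · intro hr
      induction hr with
      | refl => exact e5 seed (Or.inl List.mem_cons_self)
      | @tail b c hpath hadj ihb =>
        have hmemb := ihb
        have hvisc := e4 b hmemb c hadj
        have hcin : pvInB rows cols c := hadj.2.1
        rcases (e2 c hcin).mp hvisc with h | h
        · exact absurd h (havoid c (Relation.ReflTransGen.tail hpath hadj))
        · exact h
  refine ⟨hC1, ?_, e1⟩
  intro q hq
  rw [e2 q hq, hC1 q]

-- ======== background colour: Counter.most_common(1) head = first maximal key ========

theorem pvSortedRevHead {α : Type} (key : α → Int) (l : List α) :
    (PySem.List.sorted l key true).head? = PySem.List.max? l key := by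
  induction l using List.reverseRecOn with
  | nil => rfl
  | append_singleton l x ih =>
    rw [PySem.List.sorted_rev_eq_foldl_insertBy, List.foldl_append,
      ← PySem.List.sorted_rev_eq_foldl_insertBy]
    rw [show PySem.List.max? (l ++ [x]) key =
      (match PySem.List.max? l key with
        | none => some x
        | some m => if key m < key x then some x else some m) from by
        unfold PySem.List.max?; rw [List.foldl_append]; rfl]
    rw [← ih]
    cases hslt : PySem.List.sorted l key true with
    | nil => simp [List.foldl, PySem.List.insertBy]
    | cons m t =>
      simp only [List.foldl]
      unfold PySem.List.insertBy
      by_cases hlt : key m < key x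
      · rw [if_pos (by simpa using hlt)]
        simp [hlt]
      · rw [if_neg (by simpa using hlt)]
        simp [hlt]

theorem pvMax?_append {α : Type} (k : α → Int) (l : List α) (x : α) :
    PySem.List.max? (l ++ [x]) k = match PySem.List.max? l k with
      | none => some x
      | some m => if k m < k x then some x else some m := by
  unfold PySem.List.max?
  rw [List.foldl_append]
  rfl

theorem pvMax?_mapCongr {α β : Type} (f : α → β) (k1 : α → Int) (k2 : β → Int) (l : List α)
    (h : ∀ x ∈ l, k2 (f x) = k1 x) :
    PySem.List.max? (l.map f) k2 = Option.map f (PySem.List.max? l k1) := by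
  induction l using List.reverseRecOn with
  | nil => rfl
  | append_singleton l x ih =>
    rw [List.map_append]
    simp only [List.map_cons, List.map_nil]
    rw [pvMax?_append, pvMax?_append, ih (fun y hy => h y (List.mem_append_left _ hy))]
    have hx := h x (List.mem_append_right _ List.mem_cons_self)
    cases hm : PySem.List.max? l k1 with
    | none => rfl
    | some m =>
      have hmem := PySem.List.max?_mem hm
      have hkm := h m (List.mem_append_left _ hmem)
      simp only [Option.map_some]
      rw [hkm, hx, apply_ite (Option.map f)]
      split <;> rfl

-- first-match lookup in an association list with distinct keys finds the pair itself
theorem pvFindPair {ν : Type} (l : List (Int × ν)) (hnd : (l.map Prod.fst).Nodup)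
    (x : Int × ν) (hx : x ∈ l) : l.find? (fun p => p.1 == x.1) = some x := by
  induction l with
  | nil => simp at hx
  | cons y t ih =>
    rw [List.find?_cons]
    by_cases hk : y.1 = x.1
    · have hxy : x = y := by
        rcases List.mem_cons.mp hx with rfl | hxt
        · rfl
        · exfalso
          have : x.1 ∈ t.map Prod.fst := List.mem_map.mpr ⟨x, hxt, rfl⟩
          rw [← hk] at this
          exact (List.nodup_cons.mp (by simpa using hnd)).1 this
      rw [show (y.1 == x.1) = true from by simp [hk]]
      rw [hxy]
    · rw [show (y.1 == x.1) = false from by simp [hk]]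
      refine ih (by simpa using (List.nodup_cons.mp (by simpa using hnd)).2) ?_
      rcases List.mem_cons.mp hx with rfl | hxt
      · exact absurd rfl hk
      · exact hxt

theorem pvInsertKeys {ν : Type} (d : PySem.Dict Int ν) (k : Int) (v : ν)
    (hnd : (d.items.map Prod.fst).Nodup) :
    ((PySem.Dict.insert d k v).items.map Prod.fst).Nodup ∧
    (∀ x ∈ (PySem.Dict.insert d k v).items.map Prod.fst, x ∈ d.items.map Prod.fst ∨ x = k) := by
  unfold PySem.Dict.insert
  by_cases hc : d.contains k = true
  · rw [if_pos hc]
    have : (List.map (fun p => if (p.1 == k) = true then (k, v) else p) d.items).map Prod.fst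
        = d.items.map Prod.fst := by
      rw [List.map_map]
      refine List.map_congr_left ?_
      intro p _
      by_cases hp : p.1 = k
      · simp [hp]
      · simp [hp]
    rw [show (({ items := List.map (fun p => if (p.1 == k) = true then (k, v) else p) d.items }
      : PySem.Dict Int ν)).items = List.map (fun p => if (p.1 == k) = true then (k, v) else p)
      d.items from rfl, this]
    exact ⟨hnd, fun x hx => Or.inl hx⟩
  · rw [if_neg hc]
    have hk : k ∉ d.items.map Prod.fst := by
      intro hmem
      apply hc
      obtain ⟨p, hp, hpk⟩ := List.mem_map.mp hmem
      unfold PySem.Dict.contains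
      exact List.any_eq_true.mpr ⟨p, hp, by simp [hpk]⟩
    constructor
    · rw [show (({ items := d.items ++ [(k, v)] } : PySem.Dict Int ν)).items
        = d.items ++ [(k, v)] from rfl]
      rw [List.map_append]
      simp only [List.map_cons, List.map_nil]
      exact List.Nodup.append hnd (List.nodup_singleton k)
        (by intro a ha hb; simp at hb; subst hb; exact hk ha)
    · intro x hx
      rw [show (({ items := d.items ++ [(k, v)] } : PySem.Dict Int ν)).items
        = d.items ++ [(k, v)] from rfl] at hx
      rw [List.map_append] at hx
      rcases List.mem_append.mp hx with h | h
      · exact Or.inl h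
      · simp at h
        exact Or.inr h

theorem pvInsertNodup {ν : Type} (d : PySem.Dict Int ν) (k : Int) (v : ν)
    (h : (d.items.map Prod.fst).Nodup) :
    (((PySem.Dict.insert d k v)).items.map Prod.fst).Nodup := (pvInsertKeys d k v h).1

theorem pvCounterNodup (g : List (List Int)) :
    (((g.foldl (fun d row => row.foldl (fun d v =>
      PySem.Dict.insert d v (PySem.Dict.getD d v 0 + 1 : Int)) d) PySem.Dict.empty)
      : PySem.Dict Int Int).items.map Prod.fst).Nodup := by
  have hrow : ∀ (row : List Int) (d : PySem.Dict Int Int), (d.items.map Prod.fst).Nodup →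
      (((row.foldl (fun d v => PySem.Dict.insert d v (PySem.Dict.getD d v 0 + 1 : Int)) d)
        : PySem.Dict Int Int).items.map Prod.fst).Nodup := by
    intro row
    induction row with
    | nil => intro d hd; exact hd
    | cons v t ih =>
      intro d hd
      exact ih _ (pvInsertNodup d v _ hd)
  have hg : ∀ (l : List (List Int)) (d : PySem.Dict Int Int), (d.items.map Prod.fst).Nodup →
      (((l.foldl (fun d row => row.foldl (fun d v =>
        PySem.Dict.insert d v (PySem.Dict.getD d v 0 + 1 : Int)) d) d)
        : PySem.Dict Int Int).items.map Prod.fst).Nodup := by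
    intro l
    induction l with
    | nil => intro d hd; exact hd
    | cons row t ih =>
      intro d hd
      exact ih _ (hrow row d hd)
  exact hg g PySem.Dict.empty (by simp [PySem.Dict.empty])

theorem pvBgEq (g : List (List Int)) (cols : Int)
    (hcols : ∀ row ∈ g, (row.length : Int) = cols) :
    (PySem.List.pyGetD (PySem.List.sorted (PySem.Dict.items
      ((PySem.List.pyRange 0 ((g.length : Int)) 1).foldl (fun d r =>
        (PySem.List.pyRange 0 cols 1).foldl (fun d c =>
          PySem.Dict.insert d (pvVal g r c) (PySem.Dict.getD d (pvVal g r c) 0 + 1 : Int)) d)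
        PySem.Dict.empty)) (fun kv => kv.2) true) 0 ((0 : Int), (0 : Int))).1 =
    (PySem.List.max? (PySem.Dict.keys
      (g.foldl (fun d row => row.foldl (fun d v =>
        PySem.Dict.insert d v (PySem.Dict.getD d v 0 + 1 : Int)) d) PySem.Dict.empty))
      (fun v => PySem.Dict.getD (g.foldl (fun d row => row.foldl (fun d v =>
        PySem.Dict.insert d v (PySem.Dict.getD d v 0 + 1 : Int)) d) PySem.Dict.empty) v 0)).getD 0 := by
  have hAB : ((PySem.List.pyRange 0 ((g.length : Int)) 1).foldl (fun d r =>
      (PySem.List.pyRange 0 cols 1).foldl (fun d c =>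
        PySem.Dict.insert d (pvVal g r c) (PySem.Dict.getD d (pvVal g r c) 0 + 1 : Int)) d)
      PySem.Dict.empty) =
      (g.foldl (fun d row => row.foldl (fun d v =>
        PySem.Dict.insert d v (PySem.Dict.getD d v 0 + 1 : Int)) d) PySem.Dict.empty) := by
    rw [PySem.List.foldl_congr_mem _ _ (fun d r => (PySem.List.pyGetD g r []).foldl
      (fun d v => PySem.Dict.insert d v (PySem.Dict.getD d v 0 + 1 : Int)) d) _ ?_]
    · exact PySem.List.foldl_pyRange_zero_pyGetD' g []
        (fun d row => row.foldl (fun d v =>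
          PySem.Dict.insert d v (PySem.Dict.getD d v 0 + 1 : Int)) d) PySem.Dict.empty
    · intro acc r hr
      rw [PySem.List.mem_pyRange_one] at hr
      have hrl : r.toNat < g.length := by omega
      have hmem : PySem.List.pyGetD g r [] ∈ g := by
        rw [PySem.List.pyGetD_of_nonneg _ _ hr.1, List.getD_eq_getElem _ _ hrl]
        exact List.getElem_mem hrl
      rw [← hcols _ hmem]
      simp only [pvVal]
      exact PySem.List.foldl_pyRange_zero_pyGetD' (PySem.List.pyGetD g r []) 0
        (fun d v => PySem.Dict.insert d v (PySem.Dict.getD d v 0 + 1 : Int)) acc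
  rw [hAB]
  set cnt := (g.foldl (fun d row => row.foldl (fun d v =>
    PySem.Dict.insert d v (PySem.Dict.getD d v 0 + 1 : Int)) d) PySem.Dict.empty) with hcnt
  have hget0 : ∀ (l : List (Int × Int)) (d : Int × Int), PySem.List.pyGetD l 0 d = l.head?.getD d := by
    intro l d
    rw [PySem.List.pyGetD_of_nonneg _ _ (le_refl 0)]
    cases l <;> rfl
  rw [hget0, pvSortedRevHead]
  have hnd : (cnt.items.map Prod.fst).Nodup := pvCounterNodup g
  have hkeys : PySem.Dict.keys cnt = cnt.items.map Prod.fst := rfl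
  rw [hkeys, pvMax?_mapCongr Prod.fst (fun kv => kv.2) _ cnt.items ?_]
  · cases PySem.List.max? cnt.items (fun kv => kv.2) with
    | none => rfl
    | some m => rfl
  · intro x hx
    unfold PySem.Dict.getD PySem.Dict.get?
    rw [pvFindPair cnt.items hnd x hx]
    rfl

-- ======== seeds, class minima, prefix bookkeeping ========

def pvOddOff (comp : List (Int × Int)) (q : Int × Int) : Prop :=
  PySem.Int.mod (q.1 - pvMinFst comp) 2 = 1 ∧ PySem.Int.mod (q.2 - pvMinSnd comp) 2 = 1

def pvHolePP (g : List (List Int)) (rows cols bg : Int) (P : List (Int × Int))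
    (q : Int × Int) : Prop :=
  ∃ s ∈ P, pvIsSeed g rows cols bg s ∧ pvReach g rows cols bg s q ∧
    ∃ mr mc, pvClassMin g rows cols bg s mr mc ∧
      PySem.Int.mod (q.1 - mr) 2 = 1 ∧ PySem.Int.mod (q.2 - mc) 2 = 1

theorem pvVisP_avoid (g : List (List Int)) (rows cols bg : Int) (P : List (Int × Int))
    (seed : Int × Int) (h : ¬ pvVisP g rows cols bg P seed) :
    ∀ q, pvReach g rows cols bg seed q → ¬ pvVisP g rows cols bg P q := by
  rintro q hr ⟨p', hm, hin, hnb, hr'⟩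
  exact h ⟨p', hm, hin, hnb, hr'.trans (pvReach_symm g rows cols bg seed q hr)⟩

theorem pvVisP_append (g : List (List Int)) (rows cols bg : Int) (P : List (Int × Int))
    (p : Int × Int) (q : Int × Int) :
    pvVisP g rows cols bg (P ++ [p]) q ↔ pvVisP g rows cols bg P q ∨
      (pvInB rows cols p ∧ pvVal g p.1 p.2 ≠ bg ∧ pvReach g rows cols bg p q) := by
  unfold pvVisP
  constructor
  · rintro ⟨p', hm, rest⟩
    rcases List.mem_append.mp hm with h | h
    · exact Or.inl ⟨p', h, rest⟩
    · rw [List.mem_singleton.mp h] at rest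
      exact Or.inr rest
  · rintro (⟨p', hm, rest⟩ | h)
    · exact ⟨p', List.mem_append_left _ hm, rest⟩
    · exact ⟨p, List.mem_append_right _ List.mem_cons_self, h⟩

theorem pvVisP_addNonSeed (g : List (List Int)) (rows cols bg : Int) (P : List (Int × Int))
    (p : Int × Int) (hp : pvVal g p.1 p.2 = bg ∨ pvVisP g rows cols bg P p) (q : Int × Int) :
    pvVisP g rows cols bg (P ++ [p]) q ↔ pvVisP g rows cols bg P q := by
  rw [pvVisP_append]
  constructor
  · rintro (h | ⟨hin, hnb, hr⟩)
    · exact h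
    · rcases hp with hbg | ⟨p', hm, hin', hnb', hr'⟩
      · exact absurd hbg hnb
      · exact ⟨p', hm, hin', hnb', hr'.trans hr⟩
  · exact Or.inl

theorem pvIsSeed_iff_branch (g : List (List Int)) (rows cols bg : Int)
    (P rest : List (Int × Int)) (p : Int × Int)
    (hc : pvCells rows cols = P ++ p :: rest) :
    (pvVal g p.1 p.2 ≠ bg ∧ ¬ pvVisP g rows cols bg P p) ↔ pvIsSeed g rows cols bg p := by
  have hpin : pvInB rows cols p := (pvCells_mem rows cols p).mp (by
    rw [hc]; exact List.mem_append_right _ List.mem_cons_self)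
  constructor
  · rintro ⟨hnb, hnv⟩
    refine ⟨hpin, hnb, ?_⟩
    intro q hr
    by_contra hnle
    have hlt : pvScanLT q p := by
      unfold pvScanLE at hnle
      unfold pvScanLT
      omega
    have hq := pvReach_val g rows cols bg p q hpin hnb hr
    have hqP : q ∈ P := (pvCells_prefix_char rows cols P rest p hc q).mpr ⟨hq.1, hlt⟩
    exact hnv ⟨q, hqP, hq.1, by rw [hq.2]; exact hnb,
      pvReach_symm g rows cols bg p q hr⟩
  · rintro ⟨_, hnb, hmin⟩
    refine ⟨hnb, ?_⟩
    rintro ⟨p', hm, hin', hnb', hr'⟩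
    have hle := hmin p' (pvReach_symm g rows cols bg p' p hr')
    have hlt := ((pvCells_prefix_char rows cols P rest p hc p').mp hm).2
    unfold pvScanLE at hle
    unfold pvScanLT at hlt
    omega

theorem pvHolePP_addNonSeed (g : List (List Int)) (rows cols bg : Int) (P : List (Int × Int))
    (p : Int × Int) (hp : ¬ pvIsSeed g rows cols bg p) (q : Int × Int) :
    pvHolePP g rows cols bg (P ++ [p]) q ↔ pvHolePP g rows cols bg P q := by
  unfold pvHolePP
  constructor
  · rintro ⟨s, hm, rest⟩
    rcases List.mem_append.mp hm with h | h
    · exact ⟨s, h, rest⟩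
    · rw [List.mem_singleton.mp h] at rest
      exact absurd rest.1 hp
  · rintro ⟨s, hm, rest⟩
    exact ⟨s, List.mem_append_left _ hm, rest⟩

theorem pvMinFst_spec (comp : List (Int × Int)) (x0 : Int × Int) (hx0 : x0 ∈ comp) :
    (∃ x ∈ comp, x.1 = pvMinFst comp) ∧ (∀ x ∈ comp, pvMinFst comp ≤ x.1) := by
  unfold pvMinFst
  cases hm : PySem.List.min? (comp.map (fun p => p.1)) (fun x => x) with
  | none =>
    rw [PySem.List.min?_eq_none_iff] at hm
    rw [List.map_eq_nil_iff.mp hm] at hx0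
    simp at hx0
  | some m =>
    have hmem := PySem.List.min?_mem hm
    have hmin := PySem.List.min?_isMin hm
    obtain ⟨x, hx, hxm⟩ := List.mem_map.mp hmem
    refine ⟨⟨x, hx, by rw [hxm]; rfl⟩, ?_⟩
    intro y hy
    simpa using hmin y.1 (List.mem_map.mpr ⟨y, hy, rfl⟩)

theorem pvMinSnd_spec (comp : List (Int × Int)) (x0 : Int × Int) (hx0 : x0 ∈ comp) :
    (∃ x ∈ comp, x.2 = pvMinSnd comp) ∧ (∀ x ∈ comp, pvMinSnd comp ≤ x.2) := by
  unfold pvMinSnd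
  cases hm : PySem.List.min? (comp.map (fun p => p.2)) (fun x => x) with
  | none =>
    rw [PySem.List.min?_eq_none_iff] at hm
    rw [List.map_eq_nil_iff.mp hm] at hx0
    simp at hx0
  | some m =>
    have hmem := PySem.List.min?_mem hm
    have hmin := PySem.List.min?_isMin hm
    obtain ⟨x, hx, hxm⟩ := List.mem_map.mp hmem
    refine ⟨⟨x, hx, by rw [hxm]; rfl⟩, ?_⟩
    intro y hy
    simpa using hmin y.2 (List.mem_map.mpr ⟨y, hy, rfl⟩)

theorem pvClassMin_of_comp (g : List (List Int)) (rows cols bg : Int) (s : Int × Int)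
    (comp : List (Int × Int)) (hiff : ∀ x, x ∈ comp ↔ pvReach g rows cols bg s x) :
    pvClassMin g rows cols bg s (pvMinFst comp) (pvMinSnd comp) := by
  have hsc : s ∈ comp := (hiff s).mpr Relation.ReflTransGen.refl
  obtain ⟨⟨x1, hx1, he1⟩, hlo1⟩ := pvMinFst_spec comp s hsc
  obtain ⟨⟨x2, hx2, he2⟩, hlo2⟩ := pvMinSnd_spec comp s hsc
  exact ⟨⟨x1, (hiff x1).mp hx1, he1⟩, fun x hx => hlo1 x ((hiff x).mpr hx),
    ⟨x2, (hiff x2).mp hx2, he2⟩, fun x hx => hlo2 x ((hiff x).mpr hx)⟩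

-- ======== generic fold-invariant driver ========

theorem pvFoldInv {S A : Type} (step : S → A → S) (Inv : List A → S → Prop)
    (full : List A)
    (h : ∀ P p rest st, full = P ++ p :: rest → Inv P st → Inv (P ++ [p]) (step st p)) :
    ∀ P rest st, full = P ++ rest → Inv P st → Inv full (rest.foldl step st) := by
  intro P rest
  induction rest generalizing P with
  | nil => intro st hfull hi; simpa [hfull] using hi
  | cons p t ih =>
    intro st hfull hi
    simpa using ih (P ++ [p]) (step st p) (by simpa using hfull) (h P p t st hfull hi)

-- ======== scan invariant, A side ========

def pvStepA (g : List (List Int)) (rows cols bg : Int)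
    (st : List (List Bool) × List (Int × List (Int × Int))) (q : Int × Int) :
    List (List Bool) × List (Int × List (Int × Int)) :=
  if pvVal g q.1 q.2 ≠ bg ∧ pvVisGet st.1 q.1 q.2 = false then
    ((pvDfs g rows cols (pvVal g q.1 q.2) (pvVisSet st.1 q.1 q.2) [(q.1, q.2)] []).2,
     st.2 ++ [(pvVal g q.1 q.2,
       (pvDfs g rows cols (pvVal g q.1 q.2) (pvVisSet st.1 q.1 q.2) [(q.1, q.2)] []).1)])
  else st

theorem pvScanA_eq (g : List (List Int)) (rows cols bg : Int) :
    pvScanA g rows cols bg = (pvCells rows cols).foldl (pvStepA g rows cols bg)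
      (List.replicate rows.toNat (List.replicate cols.toNat false), []) := by
  unfold pvScanA pvCells pvStepA
  rw [List.foldl_flatMap]
  apply PySem.List.foldl_congr_mem
  intro acc r _
  rw [List.foldl_map]

def pvInvA (g : List (List Int)) (rows cols bg : Int) (P : List (Int × Int))
    (st : List (List Bool) × List (Int × List (Int × Int))) : Prop :=
  pvShape rows cols st.1 ∧
  (∀ q, pvInB rows cols q → (pvVisGet st.1 q.1 q.2 = true ↔ pvVisP g rows cols bg P q)) ∧
  (∀ o ∈ st.2, ∃ s ∈ P, pvIsSeed g rows cols bg s ∧ o.1 = pvVal g s.1 s.2 ∧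
    (∀ x, x ∈ o.2 ↔ pvReach g rows cols bg s x)) ∧
  (∀ q, (∃ o ∈ st.2, q ∈ o.2 ∧ pvOddOff o.2 q) ↔ pvHolePP g rows cols bg P q)

theorem pvStepA_inv (g : List (List Int)) (rows cols bg : Int)
    (P rest : List (Int × Int)) (p : Int × Int)
    (st : List (List Bool) × List (Int × List (Int × Int)))
    (hc : pvCells rows cols = P ++ p :: rest)
    (hinv : pvInvA g rows cols bg P st) :
    pvInvA g rows cols bg (P ++ [p]) (pvStepA g rows cols bg st p) := by
  obtain ⟨h1, h2, h3, h4⟩ := hinv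
  have hpin : pvInB rows cols p := (pvCells_mem rows cols p).mp (by
    rw [hc]; exact List.mem_append_right _ List.mem_cons_self)
  unfold pvStepA
  split
  case isTrue hbr =>
    obtain ⟨hnb, hunv⟩ := hbr
    have hnvP : ¬ pvVisP g rows cols bg P p := by
      intro hv
      rw [(h2 p hpin).mpr hv] at hunv
      exact absurd hunv (by simp)
    have hseed : pvIsSeed g rows cols bg p :=
      (pvIsSeed_iff_branch g rows cols bg P rest p hc).mp ⟨hnb, hnvP⟩
    have havoid := pvVisP_avoid g rows cols bg P p hnvP
    have hpp : ((p.1, p.2) : Int × Int) = p := rfl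
    obtain ⟨c1, c2, c3⟩ := pvDfs_component g rows cols bg p st.1 (pvVisP g rows cols bg P)
      h1 hpin hnb (fun q hq => by rw [h2 q hq]) havoid
    simp only [hpp]
    have hcomp := c1
    refine ⟨c3, ?_, ?_, ?_⟩
    · intro q hq
      rw [c2 q hq, pvVisP_append]
      constructor
      · rintro (h | h)
        · exact Or.inl h
        · exact Or.inr ⟨hpin, hnb, h⟩
      · rintro (h | h)
        · exact Or.inl h
        · exact Or.inr h.2.2
    · intro o ho
      rcases List.mem_append.mp ho with ho | ho
      · obtain ⟨s, hm, rest'⟩ := h3 o ho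
        exact ⟨s, List.mem_append_left _ hm, rest'⟩
      · rw [List.mem_singleton.mp ho]
        exact ⟨p, List.mem_append_right _ List.mem_cons_self, hseed, rfl, hcomp⟩
    · intro q
      constructor
      · rintro ⟨o, ho, hqo, hodd⟩
        rcases List.mem_append.mp ho with ho | ho
        · obtain ⟨s, hm, hrest⟩ := (h4 q).mp ⟨o, ho, hqo, hodd⟩
          exact ⟨s, List.mem_append_left _ hm, hrest⟩
        · rw [List.mem_singleton.mp ho] at hqo hodd
          refine ⟨p, List.mem_append_right _ List.mem_cons_self, hseed,
            (hcomp q).mp hqo, pvMinFst _, pvMinSnd _, ?_, hodd.1, hodd.2⟩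
          exact pvClassMin_of_comp g rows cols bg p _ hcomp
      · rintro ⟨s, hm, hs, hr, mr, mc, hmin, ho1, ho2⟩
        rcases List.mem_append.mp hm with hm | hm
        · obtain ⟨o, ho, hrest⟩ := (h4 q).mpr ⟨s, hm, hs, hr, mr, mc, hmin, ho1, ho2⟩
          exact ⟨o, List.mem_append_left _ ho, hrest⟩
        · rw [List.mem_singleton.mp hm] at hs hr hmin
          have hcm := pvClassMin_of_comp g rows cols bg p _ hcomp
          obtain ⟨e1, e2⟩ := pvClassMin_unique g rows cols bg p mr mc _ _ hmin hcm
          refine ⟨(pvVal g p.1 p.2,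
            (pvDfs g rows cols (pvVal g p.1 p.2) (pvVisSet st.1 p.1 p.2) [(p.1, p.2)] []).1),
            List.mem_append_right _ List.mem_cons_self, (hcomp q).mpr hr, ?_, ?_⟩
          · rw [← e1]
            exact ho1
          · rw [← e2]
            exact ho2
  case isFalse hbr =>
    have hnseed : ¬ pvIsSeed g rows cols bg p := by
      intro hs
      obtain ⟨hnb, hnv⟩ := (pvIsSeed_iff_branch g rows cols bg P rest p hc).mpr hs
      apply hbr
      refine ⟨hnb, ?_⟩
      cases hv : pvVisGet st.1 p.1 p.2 with
      | false => rfl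
      | true => exact absurd ((h2 p hpin).mp hv) hnv
    have hbgvis : pvVal g p.1 p.2 = bg ∨ pvVisP g rows cols bg P p := by
      by_cases hb : pvVal g p.1 p.2 = bg
      · exact Or.inl hb
      · right
        by_contra hnv
        exact hbr ⟨hb, by
          cases hv : pvVisGet st.1 p.1 p.2 with
          | false => rfl
          | true => exact absurd ((h2 p hpin).mp hv) hnv⟩
    refine ⟨h1, ?_, ?_, ?_⟩
    · intro q hq
      rw [h2 q hq, pvVisP_addNonSeed g rows cols bg P p hbgvis q]
    · intro o ho
      obtain ⟨s, hm, rest'⟩ := h3 o ho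
      exact ⟨s, List.mem_append_left _ hm, rest'⟩
    · intro q
      rw [pvHolePP_addNonSeed g rows cols bg P p hnseed q]
      exact h4 q

theorem pvScanA_master (g : List (List Int)) (rows cols bg : Int) :
    pvInvA g rows cols bg (pvCells rows cols) (pvScanA g rows cols bg) := by
  rw [pvScanA_eq]
  refine pvFoldInv (pvStepA g rows cols bg) (pvInvA g rows cols bg) (pvCells rows cols)
    (fun P p rest st hfull hi => pvStepA_inv g rows cols bg P rest p st hfull hi)
    [] (pvCells rows cols) _ rfl ?_
  refine ⟨pvReplicate_shape rows cols, ?_, by simp, ?_⟩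
  · intro q hq
    rw [pvVisGet_replicate rows cols q hq]
    unfold pvVisP
    simp
  · intro q
    unfold pvHolePP
    simp

-- ======== B side: quick-find dictionaries ========

theorem pvFindFilterNe {ν : Type} (l : List ((Int × Int) × ν)) (k x : Int × Int) :
    (l.filter (fun p => !(p.1 == k))).find? (fun p => p.1 == x)
      = if x = k then none else l.find? (fun p => p.1 == x) := by
  induction l with
  | nil => simp
  | cons y t ih =>
    by_cases hyk : y.1 = k
    · rw [List.filter_cons_of_neg (by simp [hyk]), ih]
      by_cases hxk : x = k
      · rw [if_pos hxk, if_pos hxk]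
      · rw [if_neg hxk, if_neg hxk,
          List.find?_cons_of_neg (by simp; intro h; exact hxk (h ▸ hyk))]
    · rw [List.filter_cons_of_pos (by simp [hyk])]
      by_cases hyx : y.1 = x
      · have hxk : ¬ x = k := fun h => hyk (hyx.trans h)
        rw [List.find?_cons_of_pos (by simp [hyx]), if_neg hxk,
          List.find?_cons_of_pos (by simp [hyx])]
      · rw [List.find?_cons_of_neg (by simp [hyx]), ih]
        by_cases hxk : x = k
        · rw [if_pos hxk, if_pos hxk]
        · rw [if_neg hxk, if_neg hxk, List.find?_cons_of_neg (by simp [hyx])]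

theorem pvEraseGet {ν : Type} (d : PySem.Dict (Int × Int) ν) (k x : Int × Int) :
    PySem.Dict.get? (PySem.Dict.erase d k) x
      = if x = k then none else PySem.Dict.get? d x := by
  show (Option.map _ (List.find? _ (List.filter _ d.items))) = _
  rw [pvFindFilterNe]
  split
  · rfl
  · rfl

theorem pvEraseNodup {ν : Type} (d : PySem.Dict (Int × Int) ν) (k : Int × Int)
    (h : (PySem.Dict.keys d).Nodup) : (PySem.Dict.keys (PySem.Dict.erase d k)).Nodup := by
  have hsub : (PySem.Dict.erase d k).items.Sublist d.items := List.filter_sublist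
  exact List.Nodup.sublist (hsub.map _) h

theorem pvRelabelGet (L : List (Int × Int)) (lab : PySem.Dict (Int × Int) (Int × Int))
    (b x : Int × Int) :
    PySem.Dict.get? (L.foldl (fun lab cell => PySem.Dict.insert lab cell b) lab) x
      = if x ∈ L then some b else PySem.Dict.get? lab x := by
  induction L generalizing lab with
  | nil => simp
  | cons c t ih =>
    simp only [List.foldl_cons]
    rw [ih]
    by_cases hxt : x ∈ t
    · rw [if_pos hxt, if_pos (List.mem_cons_of_mem _ hxt)]
    · rw [if_neg hxt, PySem.Dict.get?_insert]
      by_cases hxc : x = c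
      · rw [if_pos hxc, if_pos (by rw [hxc]; exact List.mem_cons_self)]
      · rw [if_neg hxc, if_neg (by simp [hxc, hxt])]

-- ======== B side: semantic layer (prefix-restricted reachability) ========

def pvKeyIn (g : List (List Int)) (rows cols bg : Int) (P : List (Int × Int))
    (q : Int × Int) : Prop :=
  pvInB rows cols q ∧ pvVal g q.1 q.2 ≠ bg ∧ q ∈ P

def pvAdjIn (g : List (List Int)) (rows cols bg : Int) (P : List (Int × Int))
    (a b : Int × Int) : Prop :=
  pvAdj g rows cols bg a b ∧ a ∈ P ∧ b ∈ P

def pvReachIn (g : List (List Int)) (rows cols bg : Int) (P : List (Int × Int))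
    (a b : Int × Int) : Prop :=
  Relation.ReflTransGen (pvAdjIn g rows cols bg P) a b

-- the two cells carry the same quick-find label
def pvSame (lab : PySem.Dict (Int × Int) (Int × Int)) (q q' : Int × Int) : Prop :=
  ∃ rep, PySem.Dict.get? lab q = some rep ∧ PySem.Dict.get? lab q' = some rep

-- quick-find state invariant, parametric in the intended equivalence S
def pvPart (g : List (List Int)) (rows cols bg : Int) (P : List (Int × Int))
    (S : (Int × Int) → (Int × Int) → Prop)
    (st : PySem.Dict (Int × Int) (Int × Int) × PySem.Dict (Int × Int) (List (Int × Int))) :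
    Prop :=
  (PySem.Dict.keys st.2).Nodup ∧
  (∀ q, (PySem.Dict.get? st.1 q).isSome ↔ pvKeyIn g rows cols bg P q) ∧
  (∀ q rep, PySem.Dict.get? st.1 q = some rep → PySem.Dict.get? st.1 rep = some rep) ∧
  (∀ rep L, PySem.Dict.get? st.2 rep = some L →
    ∀ x, x ∈ L ↔ PySem.Dict.get? st.1 x = some rep) ∧
  (∀ rep, (PySem.Dict.get? st.2 rep).isSome ↔ PySem.Dict.get? st.1 rep = some rep) ∧
  (∀ q q', pvKeyIn g rows cols bg P q → pvKeyIn g rows cols bg P q' →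
    (pvSame st.1 q q' ↔ S q q'))

-- joining the classes of x and y
def pvJoin (S : (Int × Int) → (Int × Int) → Prop) (x y : Int × Int)
    (q q' : Int × Int) : Prop :=
  S q q' ∨ (S q x ∧ S y q') ∨ (S q y ∧ S x q')

def pvEqv (S : (Int × Int) → (Int × Int) → Prop) : Prop :=
  (∀ x, S x x) ∧ (∀ x y, S x y → S y x) ∧ (∀ x y z, S x y → S y z → S x z)

theorem pvEqv_join (S : (Int × Int) → (Int × Int) → Prop) (x y : Int × Int)
    (h : pvEqv S) : pvEqv (pvJoin S x y) := by
  obtain ⟨hr, hs, ht⟩ := h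
  refine ⟨fun a => Or.inl (hr a), ?_, ?_⟩
  · rintro a b (h1 | ⟨h1, h2⟩ | ⟨h1, h2⟩)
    · exact Or.inl (hs _ _ h1)
    · exact Or.inr (Or.inr ⟨hs _ _ h2, hs _ _ h1⟩)
    · exact Or.inr (Or.inl ⟨hs _ _ h2, hs _ _ h1⟩)
  · rintro a b c (h1 | ⟨h1, h2⟩ | ⟨h1, h2⟩) (h3 | ⟨h3, h4⟩ | ⟨h3, h4⟩)
    · exact Or.inl (ht _ _ _ h1 h3)
    · exact Or.inr (Or.inl ⟨ht _ _ _ h1 h3, h4⟩)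
    · exact Or.inr (Or.inr ⟨ht _ _ _ h1 h3, h4⟩)
    · exact Or.inr (Or.inl ⟨h1, ht _ _ _ h2 h3⟩)
    · exact Or.inr (Or.inl ⟨h1, h4⟩)
    · exact Or.inl (ht _ _ _ h1 h4)
    · exact Or.inr (Or.inr ⟨h1, ht _ _ _ h2 h3⟩)
    · exact Or.inl (ht _ _ _ h1 h4)
    · exact Or.inr (Or.inr ⟨h1, h4⟩)

theorem pvJoin_sub (S R : (Int × Int) → (Int × Int) → Prop) (x y : Int × Int)
    (hsub : ∀ a b, S a b → R a b) (hR : pvEqv R) (hxy : R x y) :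
    ∀ a b, pvJoin S x y a b → R a b := by
  obtain ⟨hr, hs, ht⟩ := hR
  rintro a b (h | ⟨h1, h2⟩ | ⟨h1, h2⟩)
  · exact hsub _ _ h
  · exact ht _ _ _ (ht _ _ _ (hsub _ _ h1) hxy) (hsub _ _ h2)
  · exact ht _ _ _ (ht _ _ _ (hsub _ _ h1) (hs _ _ hxy)) (hsub _ _ h2)

theorem pvRTG_sub {α : Type} (r : α → α → Prop) (R : α → α → Prop)
    (hrefl : ∀ x, R x x) (htr : ∀ x y z, R x y → R y z → R x z)
    (hedge : ∀ a b, r a b → R a b) :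
    ∀ a b, Relation.ReflTransGen r a b → R a b := by
  intro a b h
  induction h with
  | refl => exact hrefl a
  | tail _ he ih => exact htr _ _ _ ih (hedge _ _ he)

theorem pvPart_congr (g : List (List Int)) (rows cols bg : Int)
    (P P' : List (Int × Int)) (S S' : (Int × Int) → (Int × Int) → Prop)
    (st : PySem.Dict (Int × Int) (Int × Int) × PySem.Dict (Int × Int) (List (Int × Int)))
    (hK : ∀ q, pvKeyIn g rows cols bg P q ↔ pvKeyIn g rows cols bg P' q)
    (hS : ∀ q q', pvKeyIn g rows cols bg P q → pvKeyIn g rows cols bg P q' →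
      (S q q' ↔ S' q q'))
    (h : pvPart g rows cols bg P S st) : pvPart g rows cols bg P' S' st := by
  obtain ⟨h1, h2, h3, h4, h5, h6⟩ := h
  refine ⟨h1, fun q => (h2 q).trans (hK q), h3, h4, h5, ?_⟩
  intro q q' hq hq'
  have hq0 := (hK q).mpr hq
  have hq0' := (hK q').mpr hq'
  exact ((h6 q q' hq0 hq0').trans (hS q q' hq0 hq0'))

-- one-step freshness facts for the prefix relations
theorem pvReachIn_fresh (g : List (List Int)) (rows cols bg : Int) (P : List (Int × Int))
    (p : Int × Int) (hp : p ∉ P) :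
    (∀ x, pvReachIn g rows cols bg P p x → x = p) ∧
    (∀ x, pvReachIn g rows cols bg P x p → x = p) := by
  constructor
  · intro x h
    rcases Relation.ReflTransGen.cases_head h with h | ⟨c, hc, _⟩
    · exact h.symm
    · exact absurd hc.2.1 hp
  · intro x h
    rcases Relation.ReflTransGen.cases_tail h with h | ⟨c, _, hc⟩
    · exact h.symm
    · exact absurd hc.2.2 hp

theorem pvReachIn_mono (g : List (List Int)) (rows cols bg : Int) (P P' : List (Int × Int))
    (hsub : ∀ x, x ∈ P → x ∈ P') (a b : Int × Int)
    (h : pvReachIn g rows cols bg P a b) : pvReachIn g rows cols bg P' a b := by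
  exact Relation.ReflTransGen.mono (fun x y hxy => ⟨hxy.1, hsub _ hxy.2.1, hsub _ hxy.2.2⟩) h

theorem pvReachIn_eqv (g : List (List Int)) (rows cols bg : Int) (P : List (Int × Int)) :
    pvEqv (pvReachIn g rows cols bg P) := by
  refine ⟨fun x => Relation.ReflTransGen.refl, ?_, fun x y z h1 h2 => h1.trans h2⟩
  intro x y h
  exact (Relation.ReflTransGen.symmetric (fun a b hab =>
    ⟨pvAdj_symm g rows cols bg a b hab.1, hab.2.2, hab.2.1⟩)) h

-- ======== B side: union and singleton operations preserve the invariant ========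

theorem pvUnionPart (g : List (List Int)) (rows cols bg : Int) (P : List (Int × Int))
    (S : (Int × Int) → (Int × Int) → Prop)
    (lab : PySem.Dict (Int × Int) (Int × Int))
    (mem : PySem.Dict (Int × Int) (List (Int × Int)))
    (p e a b : Int × Int)
    (hEqv : pvEqv S)
    (hpart : pvPart g rows cols bg P S (lab, mem))
    (hkp : pvKeyIn g rows cols bg P p) (hke : pvKeyIn g rows cols bg P e)
    (hpa : PySem.Dict.get? lab p = some a) (heb : PySem.Dict.get? lab e = some b)
    (hab : a ≠ b) :
    pvPart g rows cols bg P (pvJoin S p e) (pvUnion (lab, mem) a b) := by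
  obtain ⟨hEr, hEs, hEt⟩ := hEqv
  obtain ⟨hNK, hK, hR, hM, hMK, hE⟩ := hpart
  have hra : PySem.Dict.get? lab a = some a := hR p a hpa
  have hrb : PySem.Dict.get? lab b = some b := hR e b heb
  obtain ⟨La, hLa⟩ : ∃ L, PySem.Dict.get? mem a = some L :=
    Option.isSome_iff_exists.mp ((hMK a).mpr hra)
  obtain ⟨Lb, hLb⟩ : ∃ L, PySem.Dict.get? mem b = some L :=
    Option.isSome_iff_exists.mp ((hMK b).mpr hrb)
  have hMa := hM a La hLa
  have hMb := hM b Lb hLb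
  have hgda : PySem.Dict.getD mem a [] = La := by unfold PySem.Dict.getD; rw [hLa]; rfl
  have hgdb : PySem.Dict.getD mem b [] = Lb := by unfold PySem.Dict.getD; rw [hLb]; rfl
  have hun : pvUnion (lab, mem) a b =
      (La.foldl (fun lab cell => PySem.Dict.insert lab cell b) lab,
       PySem.Dict.erase (PySem.Dict.insert mem b (Lb ++ La)) a) := by
    show ((PySem.Dict.getD mem a []).foldl _ lab,
      PySem.Dict.erase (PySem.Dict.insert mem b
        (PySem.Dict.getD mem b [] ++ PySem.Dict.getD mem a [])) a) = _
    rw [hgda, hgdb]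
  rw [hun]
  have hU1 : ∀ x, PySem.Dict.get? (La.foldl (fun lab cell => PySem.Dict.insert lab cell b) lab) x
      = if PySem.Dict.get? lab x = some a then some b else PySem.Dict.get? lab x := by
    intro x
    rw [pvRelabelGet]
    by_cases hx : PySem.Dict.get? lab x = some a
    · rw [if_pos ((hMa x).mpr hx), if_pos hx]
    · rw [if_neg (fun hm => hx ((hMa x).mp hm)), if_neg hx]
  have hU2 : ∀ rep, PySem.Dict.get? (PySem.Dict.erase (PySem.Dict.insert mem b (Lb ++ La)) a) rep
      = if rep = a then none else if rep = b then some (Lb ++ La)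
        else PySem.Dict.get? mem rep := by
    intro rep
    rw [pvEraseGet, PySem.Dict.get?_insert]
  unfold pvPart
  dsimp only
  refine ⟨pvEraseNodup _ _ (PySem.Dict.nodup_keys_insert _ _ _ hNK), ?_, ?_, ?_, ?_, ?_⟩
  · -- K
    intro q
    rw [hU1 q]
    by_cases hq : PySem.Dict.get? lab q = some a
    · rw [if_pos hq]
      simp only [Option.isSome_some, true_iff]
      exact (hK q).mp (by rw [hq]; rfl)
    · rw [if_neg hq]
      exact hK q
  · -- R
    intro q rep h
    rw [hU1 q] at h
    rw [hU1 rep]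
    by_cases hq : PySem.Dict.get? lab q = some a
    · rw [if_pos hq] at h
      have hrep : rep = b := (Option.some.inj h).symm
      subst hrep
      rw [if_neg (by rw [hrb]; exact fun hc => hab (Option.some.inj hc).symm)]
      exact hrb
    · rw [if_neg hq] at h
      have hrr := hR q rep h
      have hrna : rep ≠ a := fun hc => hq (hc ▸ h)
      rw [if_neg (by rw [hrr]; exact fun hc => hrna (Option.some.inj hc))]
      exact hrr
  · -- M
    intro rep L hL x
    rw [hU2 rep] at hL
    by_cases h1 : rep = a
    · rw [if_pos h1] at hL; cases hL
    · rw [if_neg h1] at hL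
      by_cases h2 : rep = b
      · rw [if_pos h2] at hL
        have hLL : L = Lb ++ La := (Option.some.inj hL).symm
        subst hLL
        subst h2
        rw [hU1 x]
        constructor
        · intro hx
          rcases List.mem_append.mp hx with hx | hx
          · have hxb := (hMb x).mp hx
            rw [if_neg (by rw [hxb]; exact fun hc => hab (Option.some.inj hc).symm)]
            exact hxb
          · rw [if_pos ((hMa x).mp hx)]
        · intro hx
          by_cases hxa : PySem.Dict.get? lab x = some a
          · exact List.mem_append_right _ ((hMa x).mpr hxa)
          · rw [if_neg hxa] at hx
            exact List.mem_append_left _ ((hMb x).mpr hx)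
      · rw [if_neg h2] at hL
        rw [hM rep L hL x, hU1 x]
        by_cases hxa : PySem.Dict.get? lab x = some a
        · rw [if_pos hxa]
          constructor
          · intro h
            exact absurd (Option.some.inj (hxa.symm.trans h)).symm h1
          · intro h
            exact absurd (Option.some.inj h).symm h2
        · rw [if_neg hxa]
  · -- MK
    intro rep
    rw [hU2 rep, hU1 rep]
    by_cases h1 : rep = a
    · subst h1
      rw [if_pos rfl, if_pos hra]
      constructor
      · intro h; simp at h
      · intro h; exact absurd (Option.some.inj h) (fun hba => hab hba.symm)
    · rw [if_neg h1]
      by_cases h2 : rep = b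
      · subst h2
        rw [if_pos rfl, if_neg (by rw [hrb]; exact fun hc => hab (Option.some.inj hc).symm),
          hrb]
        simp
      · rw [if_neg h2]
        by_cases hxa : PySem.Dict.get? lab rep = some a
        · rw [if_pos hxa]
          constructor
          · intro h
            have hself := (hMK rep).mp h
            exact absurd (Option.some.inj (hself.symm.trans hxa)) h1
          · intro h
            exact absurd (Option.some.inj h).symm h2
        · rw [if_neg hxa]
          exact hMK rep
  · -- E
    intro q q' hq hq'
    obtain ⟨rq, hrq⟩ := Option.isSome_iff_exists.mp ((hK q).mpr hq)
    obtain ⟨rq', hrq'⟩ := Option.isSome_iff_exists.mp ((hK q').mpr hq')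
    have hfq : PySem.Dict.get? (La.foldl (fun lab cell => PySem.Dict.insert lab cell b) lab) q
        = some (if rq = a then b else rq) := by
      rw [hU1 q, hrq]
      by_cases h : rq = a
      · rw [if_pos (by rw [h]), if_pos h]
      · rw [if_neg (fun hc => h (Option.some.inj hc)), if_neg h]
    have hfq' : PySem.Dict.get? (La.foldl (fun lab cell => PySem.Dict.insert lab cell b) lab) q'
        = some (if rq' = a then b else rq') := by
      rw [hU1 q', hrq']
      by_cases h : rq' = a
      · rw [if_pos (by rw [h]), if_pos h]
      · rw [if_neg (fun hc => h (Option.some.inj hc)), if_neg h]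
    have hsame : pvSame (La.foldl (fun lab cell => PySem.Dict.insert lab cell b) lab) q q' ↔
        (if rq = a then b else rq) = (if rq' = a then b else rq') := by
      constructor
      · rintro ⟨rep, h1, h2⟩
        rw [hfq] at h1; rw [hfq'] at h2
        exact (Option.some.inj h1).trans (Option.some.inj h2).symm
      · intro h
        exact ⟨_, hfq, by rw [hfq', ← h]⟩
    have hrqa : rq = a ↔ S q p := by
      rw [← hE q p hq hkp]
      constructor
      · intro h; exact ⟨a, by rw [hrq, h], hpa⟩
      · rintro ⟨rep, h1, h2⟩
        exact (Option.some.inj (hrq.symm.trans h1)).trans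
          (Option.some.inj (hpa.symm.trans h2)).symm
    have hrqb : rq = b ↔ S q e := by
      rw [← hE q e hq hke]
      constructor
      · intro h; exact ⟨b, by rw [hrq, h], heb⟩
      · rintro ⟨rep, h1, h2⟩
        exact (Option.some.inj (hrq.symm.trans h1)).trans
          (Option.some.inj (heb.symm.trans h2)).symm
    have hrq'a : rq' = a ↔ S q' p := by
      rw [← hE q' p hq' hkp]
      constructor
      · intro h; exact ⟨a, by rw [hrq', h], hpa⟩
      · rintro ⟨rep, h1, h2⟩
        exact (Option.some.inj (hrq'.symm.trans h1)).trans
          (Option.some.inj (hpa.symm.trans h2)).symm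
    have hrq'b : rq' = b ↔ S q' e := by
      rw [← hE q' e hq' hke]
      constructor
      · intro h; exact ⟨b, by rw [hrq', h], heb⟩
      · rintro ⟨rep, h1, h2⟩
        exact (Option.some.inj (hrq'.symm.trans h1)).trans
          (Option.some.inj (heb.symm.trans h2)).symm
    have hrqq : rq = rq' ↔ S q q' := by
      rw [← hE q q' hq hq']
      constructor
      · intro h; exact ⟨rq, hrq, by rw [hrq', ← h]⟩
      · rintro ⟨rep, h1, h2⟩
        exact (Option.some.inj (hrq.symm.trans h1)).trans
          (Option.some.inj (hrq'.symm.trans h2)).symm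
    rw [hsame]
    unfold pvJoin
    by_cases h1 : rq = a <;> by_cases h2 : rq' = a
    · rw [if_pos h1, if_pos h2]
      constructor
      · intro _
        exact Or.inl (hEt _ _ _ (hrqa.mp h1) (hEs _ _ (hrq'a.mp h2)))
      · intro _; rfl
    · rw [if_pos h1, if_neg h2]
      constructor
      · intro h
        exact Or.inr (Or.inl ⟨hrqa.mp h1, hEs _ _ (hrq'b.mp h.symm)⟩)
      · rintro (h | ⟨ha, hb2⟩ | ⟨ha, hb2⟩)
        · exact absurd (hrq'a.mpr (hEt _ _ _ (hEs _ _ h) (hrqa.mp h1))) h2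
        · exact (hrq'b.mpr (hEs _ _ hb2)).symm
        · exact absurd (h1.symm.trans (hrqb.mpr ha)) hab
    · rw [if_neg h1, if_pos h2]
      constructor
      · intro h
        exact Or.inr (Or.inr ⟨hrqb.mp h, hEs _ _ (hrq'a.mp h2)⟩)
      · rintro (h | ⟨ha, hb2⟩ | ⟨ha, hb2⟩)
        · exact absurd (hrqa.mpr (hEt _ _ _ h (hrq'a.mp h2))) h1
        · exact absurd (hrqa.mpr ha) h1
        · exact hrqb.mpr ha
    · rw [if_neg h1, if_neg h2]
      constructor
      · intro h; exact Or.inl (hrqq.mp h)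
      · rintro (h | ⟨ha, hb2⟩ | ⟨ha, hb2⟩)
        · exact hrqq.mpr h
        · exact absurd (hrqa.mpr ha) h1
        · exact absurd (hrq'a.mpr (hEs _ _ hb2)) h2

theorem pvSingletonPart (g : List (List Int)) (rows cols bg : Int) (P : List (Int × Int))
    (S : (Int × Int) → (Int × Int) → Prop)
    (lab : PySem.Dict (Int × Int) (Int × Int))
    (mem : PySem.Dict (Int × Int) (List (Int × Int)))
    (p : Int × Int)
    (hpart : pvPart g rows cols bg P S (lab, mem))
    (hpP : p ∉ P) (hin : pvInB rows cols p) (hnb : pvVal g p.1 p.2 ≠ bg)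
    (hSfresh : ∀ x y, S x y → (x = p ↔ y = p)) :
    pvPart g rows cols bg (P ++ [p])
      (fun q q' => S q q' ∨ (q = p ∧ q' = p))
      (PySem.Dict.insert lab p p, PySem.Dict.insert mem p [p]) := by
  obtain ⟨hNK, hK, hR, hM, hMK, hE⟩ := hpart
  have hlabp : PySem.Dict.get? lab p = none := by
    rw [← Option.not_isSome_iff_eq_none]
    intro h
    exact hpP ((hK p).mp (by simpa using h)).2.2
  have hnosp : ∀ x, PySem.Dict.get? lab x ≠ some p := by
    intro x hx
    have := hR x p hx
    rw [hlabp] at this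
    cases this
  have hU1 : ∀ x, PySem.Dict.get? (PySem.Dict.insert lab p p) x
      = if x = p then some p else PySem.Dict.get? lab x :=
    fun x => PySem.Dict.get?_insert lab p x p
  have hU2 : ∀ rep, PySem.Dict.get? (PySem.Dict.insert mem p [p]) rep
      = if rep = p then some [p] else PySem.Dict.get? mem rep :=
    fun rep => PySem.Dict.get?_insert mem p rep [p]
  have hKeyIff : ∀ x, pvKeyIn g rows cols bg (P ++ [p]) x ↔
      (x = p ∨ pvKeyIn g rows cols bg P x) := by
    intro x
    unfold pvKeyIn
    constructor
    · rintro ⟨hi, hv, hm⟩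
      rcases List.mem_append.mp hm with hm | hm
      · exact Or.inr ⟨hi, hv, hm⟩
      · exact Or.inl (List.mem_singleton.mp hm)
    · rintro (rfl | ⟨hi, hv, hm⟩)
      · exact ⟨hin, hnb, List.mem_append_right _ List.mem_cons_self⟩
      · exact ⟨hi, hv, List.mem_append_left _ hm⟩
  unfold pvPart
  dsimp only
  refine ⟨PySem.Dict.nodup_keys_insert _ _ _ hNK, ?_, ?_, ?_, ?_, ?_⟩
  · -- K
    intro q
    rw [hU1 q, hKeyIff q]
    by_cases hq : q = p
    · rw [if_pos hq]
      simp [hq]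
    · rw [if_neg hq, hK q]
      constructor
      · exact Or.inr
      · rintro (h | h)
        · exact absurd h hq
        · exact h
  · -- R
    intro q rep h
    rw [hU1 q] at h
    by_cases hq : q = p
    · rw [if_pos hq] at h
      have : rep = p := (Option.some.inj h).symm
      subst this
      rw [hU1 rep, if_pos rfl]
    · rw [if_neg hq] at h
      have hrr := hR q rep h
      have hrnp : rep ≠ p := fun hc => hnosp q (hc ▸ h)
      rw [hU1 rep, if_neg hrnp]
      exact hrr
  · -- M
    intro rep L hL x
    rw [hU2 rep] at hL
    by_cases h1 : rep = p
    · rw [if_pos h1] at hL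
      have hLL : L = [p] := (Option.some.inj hL).symm
      subst hLL
      rw [hU1 x, h1]
      constructor
      · intro hx
        have hx' : x = p := List.mem_singleton.mp hx
        rw [if_pos hx']
      · intro hx
        by_cases hxp : x = p
        · simp [hxp]
        · rw [if_neg hxp] at hx
          exact absurd hx (hnosp x)
    · rw [if_neg h1] at hL
      rw [hM rep L hL x, hU1 x]
      by_cases hxp : x = p
      · rw [if_pos hxp]
        constructor
        · intro h
          rw [hxp, hlabp] at h
          cases h
        · intro h
          exact absurd (Option.some.inj h).symm h1
      · rw [if_neg hxp]
  · -- MK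
    intro rep
    rw [hU2 rep, hU1 rep]
    by_cases h1 : rep = p
    · rw [if_pos h1, if_pos h1]
      simp [h1]
    · rw [if_neg h1, if_neg h1]
      exact hMK rep
  · -- E
    intro q q' hq hq'
    rw [hKeyIff] at hq hq'
    by_cases hqp : q = p <;> by_cases hq'p : q' = p
    · constructor
      · intro _; exact Or.inr ⟨hqp, hq'p⟩
      · intro _
        exact ⟨p, by rw [hU1 q, if_pos hqp], by rw [hU1 q', if_pos hq'p]⟩
    · subst hqp
      constructor
      · rintro ⟨rep, h1, h2⟩
        rw [hU1, if_pos rfl] at h1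
        rw [hU1, if_neg hq'p] at h2
        have : rep = q := (Option.some.inj h1).symm
        subst this
        exact absurd h2 (hnosp q')
      · rintro (h | ⟨h1, h2⟩)
        · exact absurd ((hSfresh _ _ h).mp rfl) hq'p
        · exact absurd h2 hq'p
    · subst hq'p
      constructor
      · rintro ⟨rep, h1, h2⟩
        rw [hU1, if_neg hqp] at h1
        rw [hU1, if_pos rfl] at h2
        have : rep = q' := (Option.some.inj h2).symm
        subst this
        exact absurd h1 (hnosp q)
      · rintro (h | ⟨h1, h2⟩)
        · exact absurd ((hSfresh _ _ h).mpr rfl) hqp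
        · exact absurd h1 hqp
    · have hqP : pvKeyIn g rows cols bg P q := by
        rcases hq with h | h
        · exact absurd h hqp
        · exact h
      have hq'P : pvKeyIn g rows cols bg P q' := by
        rcases hq' with h | h
        · exact absurd h hq'p
        · exact h
      have hiff : pvSame (PySem.Dict.insert lab p p) q q' ↔ pvSame lab q q' := by
        unfold pvSame
        constructor
        · rintro ⟨rep, h1, h2⟩
          rw [hU1, if_neg hqp] at h1
          rw [hU1, if_neg hq'p] at h2
          exact ⟨rep, h1, h2⟩
        · rintro ⟨rep, h1, h2⟩
          exact ⟨rep, by rw [hU1, if_neg hqp]; exact h1,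
            by rw [hU1, if_neg hq'p]; exact h2⟩
      rw [hiff, hE q q' hqP hq'P]
      constructor
      · exact Or.inl
      · rintro (h | ⟨h1, h2⟩)
        · exact h
        · exact absurd h1 hqp

-- ======== B side: the scan step ========

theorem pvTryUnionPart (g : List (List Int)) (rows cols bg : Int) (P' : List (Int × Int))
    (S : (Int × Int) → (Int × Int) → Prop) (v : Int) (p q : Int × Int)
    (st : PySem.Dict (Int × Int) (Int × Int) × PySem.Dict (Int × Int) (List (Int × Int)))
    (hEqv : pvEqv S)
    (hpart : pvPart g rows cols bg P' S st)
    (hkp : pvKeyIn g rows cols bg P' p)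
    (hkq : (0 ≤ q.1 ∧ 0 ≤ q.2 ∧ pvVal g q.1 q.2 = v) → pvKeyIn g rows cols bg P' q) :
    (¬ (0 ≤ q.1 ∧ 0 ≤ q.2 ∧ pvVal g q.1 q.2 = v) → pvTryUnion g v p st q = st) ∧
    ((0 ≤ q.1 ∧ 0 ≤ q.2 ∧ pvVal g q.1 q.2 = v) →
      pvPart g rows cols bg P' (pvJoin S p q) (pvTryUnion g v p st q)) := by
  constructor
  · intro hnc
    unfold pvTryUnion
    rw [if_neg hnc]
  · intro hcond
    have hkq' := hkq hcond
    have hK := hpart.2.1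
    have hE := hpart.2.2.2.2.2
    obtain ⟨ra, hra⟩ := Option.isSome_iff_exists.mp ((hK p).mpr hkp)
    obtain ⟨rb, hrb⟩ := Option.isSome_iff_exists.mp ((hK q).mpr hkq')
    have hgda : PySem.Dict.getD st.1 p p = ra := by unfold PySem.Dict.getD; rw [hra]; rfl
    have hgdb : PySem.Dict.getD st.1 q q = rb := by unfold PySem.Dict.getD; rw [hrb]; rfl
    unfold pvTryUnion
    rw [if_pos hcond]
    show pvPart g rows cols bg P' (pvJoin S p q)
      (if PySem.Dict.getD st.1 p p = PySem.Dict.getD st.1 q q then st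
       else if (PySem.Dict.getD st.2 (PySem.Dict.getD st.1 p p) []).length >
           (PySem.Dict.getD st.2 (PySem.Dict.getD st.1 q q) []).length then
         pvUnion st (PySem.Dict.getD st.1 q q) (PySem.Dict.getD st.1 p p)
       else pvUnion st (PySem.Dict.getD st.1 p p) (PySem.Dict.getD st.1 q q))
    rw [hgda, hgdb]
    by_cases hab : ra = rb
    · rw [if_pos hab]
      have hspq : S p q := (hE p q hkp hkq').mp ⟨ra, hra, by rw [hrb, ← hab]⟩
      refine pvPart_congr g rows cols bg P' P' S (pvJoin S p q) st (fun _ => Iff.rfl) ?_ hpart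
      intro x y _ _
      constructor
      · exact Or.inl
      · exact pvJoin_sub S S p q (fun _ _ hh => hh) hEqv hspq x y
    · rw [if_neg hab]
      by_cases hsz : (PySem.Dict.getD st.2 ra []).length > (PySem.Dict.getD st.2 rb []).length
      · rw [if_pos hsz]
        have h1 := pvUnionPart g rows cols bg P' S st.1 st.2 q p rb ra hEqv hpart
          hkq' hkp hrb hra (fun hcc => hab hcc.symm)
        refine pvPart_congr g rows cols bg P' P' (pvJoin S q p) (pvJoin S p q) _
          (fun _ => Iff.rfl) ?_ h1
        intro x y _ _
        unfold pvJoin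
        tauto
      · rw [if_neg hsz]
        exact pvUnionPart g rows cols bg P' S st.1 st.2 p q ra rb hEqv hpart
          hkp hkq' hra hrb hab

-- which cells the raster step can union with: exactly the in-prefix same-color up/left neighbours
theorem pvNbrChar (g : List (List Int)) (rows cols bg : Int) (P rest : List (Int × Int))
    (p : Int × Int) (hc : pvCells rows cols = P ++ p :: rest)
    (_hpin : pvInB rows cols p) (x : Int × Int)
    (hadj : pvAdj g rows cols bg p x) (hx : x ∈ P ++ [p]) :
    (x = (p.1 - 1, p.2) ∨ x = (p.1, p.2 - 1)) ∧ x ∈ P ∧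
      0 ≤ x.1 ∧ 0 ≤ x.2 ∧ pvVal g x.1 x.2 = pvVal g p.1 p.2 := by
  obtain ⟨hpA, hxB, hnb, hval, hd⟩ := hadj
  have hxnp : x ≠ p := by
    intro hcc
    rw [hcc] at hd
    omega
  have hxP : x ∈ P := by
    rcases List.mem_append.mp hx with h | h
    · exact h
    · exact absurd (List.mem_singleton.mp h) hxnp
  have hlt : pvScanLT x p := ((pvCells_prefix_char rows cols P rest p hc x).mp hxP).2
  have hform : x = (p.1 - 1, p.2) ∨ x = (p.1, p.2 - 1) := by
    unfold pvScanLT at hlt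
    rcases hd with ⟨h1, h2⟩ | ⟨h1, h2⟩ | ⟨h1, h2⟩ | ⟨h1, h2⟩
    · exact Or.inl (Prod.ext h1 h2)
    · omega
    · exact Or.inr (Prod.ext h1 h2)
    · omega
  exact ⟨hform, hxP, hxB.1, hxB.2.2.1, hval⟩

theorem pvCondAdj (g : List (List Int)) (rows cols bg : Int) (P rest : List (Int × Int))
    (p e : Int × Int) (hc : pvCells rows cols = P ++ p :: rest)
    (hpin : pvInB rows cols p) (hnb : pvVal g p.1 p.2 ≠ bg)
    (he : e ∈ pvNbr2 p) (hcond : 0 ≤ e.1 ∧ 0 ≤ e.2 ∧ pvVal g e.1 e.2 = pvVal g p.1 p.2) :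
    pvAdj g rows cols bg p e ∧ e ∈ P := by
  obtain ⟨h1, h2, h3⟩ := hcond
  obtain ⟨a1, a2, a3, a4⟩ := hpin
  have hpin' : pvInB rows cols p := ⟨a1, a2, a3, a4⟩
  simp only [pvNbr2, List.mem_cons, List.not_mem_nil, or_false] at he
  rcases he with rfl | rfl
  · have heB : pvInB rows cols (p.1 - 1, p.2) :=
      ⟨h1, by dsimp only; omega, by dsimp only; omega, by dsimp only; omega⟩
    refine ⟨pvAdj_of_nbr g rows cols bg p _ (by simp [pvNbrs]) hpin' heB hnb h3, ?_⟩
    exact (pvCells_prefix_char rows cols P rest p hc _).mpr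
      ⟨heB, Or.inl (by dsimp only; omega)⟩
  · have heB : pvInB rows cols (p.1, p.2 - 1) :=
      ⟨by dsimp only; omega, by dsimp only; omega, h2, by dsimp only; omega⟩
    refine ⟨pvAdj_of_nbr g rows cols bg p _ (by simp [pvNbrs]) hpin' heB hnb h3, ?_⟩
    exact (pvCells_prefix_char rows cols P rest p hc _).mpr
      ⟨heB, Or.inr ⟨rfl, by dsimp only; omega⟩⟩

-- the accumulated relation equals prefix reachability once it is an equivalence containing
-- all edges at p and is contained in reachability
theorem pvFinalE (g : List (List Int)) (rows cols bg : Int) (P rest : List (Int × Int))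
    (p : Int × Int) (hc : pvCells rows cols = P ++ p :: rest) (hpin : pvInB rows cols p)
    (Sf : (Int × Int) → (Int × Int) → Prop)
    (hEqv : pvEqv Sf)
    (hsub : ∀ a b, Sf a b → pvReachIn g rows cols bg (P ++ [p]) a b)
    (hbase : ∀ a b, pvReachIn g rows cols bg P a b → Sf a b)
    (hup : (0 ≤ ((p.1 - 1, p.2) : Int × Int).1 ∧ 0 ≤ ((p.1 - 1, p.2) : Int × Int).2 ∧
      pvVal g ((p.1 - 1, p.2) : Int × Int).1 ((p.1 - 1, p.2) : Int × Int).2 = pvVal g p.1 p.2) →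
      Sf p (p.1 - 1, p.2))
    (hleft : (0 ≤ ((p.1, p.2 - 1) : Int × Int).1 ∧ 0 ≤ ((p.1, p.2 - 1) : Int × Int).2 ∧
      pvVal g ((p.1, p.2 - 1) : Int × Int).1 ((p.1, p.2 - 1) : Int × Int).2 = pvVal g p.1 p.2) →
      Sf p (p.1, p.2 - 1)) :
    ∀ q q', Sf q q' ↔ pvReachIn g rows cols bg (P ++ [p]) q q' := by
  intro q q'
  constructor
  · exact hsub q q'
  · intro h
    refine pvRTG_sub _ Sf hEqv.1 hEqv.2.2 ?_ q q' h
    rintro x y ⟨hxy, hxm, hym⟩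
    by_cases hx : x = p
    · obtain ⟨hform, hyP, hy1, hy2, hyval⟩ :=
        pvNbrChar g rows cols bg P rest p hc hpin y (hx ▸ hxy) hym
      rw [hx]
      rcases hform with rfl | rfl
      · exact hup ⟨hy1, hy2, hyval⟩
      · exact hleft ⟨hy1, hy2, hyval⟩
    · by_cases hy : y = p
      · obtain ⟨hform, hxP, hx1, hx2, hxval⟩ :=
          pvNbrChar g rows cols bg P rest p hc hpin x
            (hy ▸ (pvAdj_symm g rows cols bg x y hxy)) hxm
      -- Sf p x, then flip
        have hpx : Sf p x := by
          rcases hform with rfl | rfl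
          · exact hup ⟨hx1, hx2, hxval⟩
          · exact hleft ⟨hx1, hx2, hxval⟩
        rw [hy]
        exact hEqv.2.1 _ _ hpx
      · have hxP : x ∈ P := by
          rcases List.mem_append.mp hxm with h' | h'
          · exact h'
          · exact absurd (List.mem_singleton.mp h') hx
        have hyP : y ∈ P := by
          rcases List.mem_append.mp hym with h' | h'
          · exact h'
          · exact absurd (List.mem_singleton.mp h') hy
        exact hbase x y (Relation.ReflTransGen.single ⟨hxy, hxP, hyP⟩)

def pvInvB (g : List (List Int)) (rows cols bg : Int) (P : List (Int × Int))
    (st : PySem.Dict (Int × Int) (Int × Int) × PySem.Dict (Int × Int) (List (Int × Int))) :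
    Prop :=
  pvPart g rows cols bg P (pvReachIn g rows cols bg P) st

theorem pvStepB_inv (g : List (List Int)) (rows cols bg : Int)
    (P rest : List (Int × Int)) (p : Int × Int)
    (st : PySem.Dict (Int × Int) (Int × Int) × PySem.Dict (Int × Int) (List (Int × Int)))
    (hc : pvCells rows cols = P ++ p :: rest)
    (hinv : pvInvB g rows cols bg P st) :
    pvInvB g rows cols bg (P ++ [p]) (pvStepB g bg st p) := by
  have hpin : pvInB rows cols p := (pvCells_mem rows cols p).mp (by
    rw [hc]; exact List.mem_append_right _ List.mem_cons_self)
  have hpP : p ∉ P := pvCells_not_mem_prefix rows cols P rest p hc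
  have hPsub : ∀ x, x ∈ P → x ∈ P ++ [p] := fun x hx => List.mem_append_left _ hx
  have hfresh := pvReachIn_fresh g rows cols bg P p hpP
  have hRPEqv := pvReachIn_eqv g rows cols bg P
  have hRP'Eqv := pvReachIn_eqv g rows cols bg (P ++ [p])
  unfold pvInvB at hinv ⊢
  unfold pvStepB
  by_cases hbg : pvVal g p.1 p.2 = bg
  · rw [if_pos hbg]
    refine pvPart_congr g rows cols bg P (P ++ [p]) _ _ st ?_ ?_ hinv
    · intro q
      unfold pvKeyIn
      constructor
      · rintro ⟨hi, hv, hm⟩; exact ⟨hi, hv, hPsub q hm⟩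
      · rintro ⟨hi, hv, hm⟩
        rcases List.mem_append.mp hm with hm | hm
        · exact ⟨hi, hv, hm⟩
        · rw [List.mem_singleton.mp hm] at hv
          exact absurd hbg hv
    · intro q q' _ _
      constructor
      · exact pvReachIn_mono g rows cols bg P (P ++ [p]) hPsub q q'
      · intro h
        refine pvRTG_sub _ (pvReachIn g rows cols bg P) hRPEqv.1 hRPEqv.2.2 ?_ q q' h
        rintro x y ⟨hxy, hxm, hym⟩
        have hxP : x ∈ P := by
          rcases List.mem_append.mp hxm with h' | h'
          · exact h'
          · exfalso
            rw [List.mem_singleton.mp h'] at hxy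
            exact hxy.2.2.1 hbg
        have hyP : y ∈ P := by
          rcases List.mem_append.mp hym with h' | h'
          · exact h'
          · exfalso
            rw [List.mem_singleton.mp h'] at hxy
            exact hxy.2.2.1 (by rw [← hxy.2.2.2.1]; exact hbg)
        exact Relation.ReflTransGen.single ⟨hxy, hxP, hyP⟩
  · rw [if_neg hbg]
    have hSfresh : ∀ x y, pvReachIn g rows cols bg P x y → (x = p ↔ y = p) := by
      intro x y h
      constructor
      · intro hx; exact hfresh.1 y (hx ▸ h)
      · intro hy; exact hfresh.2 x (hy ▸ h)
    have hpart0 := pvSingletonPart g rows cols bg P _ st.1 st.2 p hinv hpP hpin hbg hSfresh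
    set S0 : (Int × Int) → (Int × Int) → Prop :=
      fun q q' => pvReachIn g rows cols bg P q q' ∨ (q = p ∧ q' = p) with hS0
    have hEqv0 : pvEqv S0 := by
      refine ⟨fun x => Or.inl (hRPEqv.1 x), ?_, ?_⟩
      · rintro x y (h | ⟨h1, h2⟩)
        · exact Or.inl (hRPEqv.2.1 _ _ h)
        · exact Or.inr ⟨h2, h1⟩
      · rintro x y z (h | ⟨h1, h2⟩) (h3 | ⟨h3, h4⟩)
        · exact Or.inl (hRPEqv.2.2 _ _ _ h h3)
        · exact Or.inr ⟨hfresh.2 x (h3 ▸ h), h4⟩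
        · exact Or.inr ⟨h1, hfresh.1 z (h2 ▸ h3)⟩
        · exact Or.inr ⟨h1, h4⟩
    have hsub0 : ∀ a b, S0 a b → pvReachIn g rows cols bg (P ++ [p]) a b := by
      rintro a b (h | ⟨h1, h2⟩)
      · exact pvReachIn_mono g rows cols bg P (P ++ [p]) hPsub a b h
      · rw [h1, h2]
        exact Relation.ReflTransGen.refl
    have hkp' : pvKeyIn g rows cols bg (P ++ [p]) p :=
      ⟨hpin, hbg, List.mem_append_right _ List.mem_cons_self⟩
    -- key / edge facts for the two neighbour candidates
    have hqkN : ∀ e ∈ pvNbr2 p,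
        (0 ≤ e.1 ∧ 0 ≤ e.2 ∧ pvVal g e.1 e.2 = pvVal g p.1 p.2) →
          pvKeyIn g rows cols bg (P ++ [p]) e ∧
            pvReachIn g rows cols bg (P ++ [p]) p e := by
      intro e he hcd
      obtain ⟨hadj, hmem⟩ := pvCondAdj g rows cols bg P rest p e hc hpin hbg he hcd
      refine ⟨⟨hadj.2.1, by rw [hadj.2.2.2.1]; exact hbg, hPsub _ hmem⟩, ?_⟩
      exact Relation.ReflTransGen.single
        ⟨hadj, List.mem_append_right _ List.mem_cons_self, hPsub _ hmem⟩
    have hupN := hqkN (p.1 - 1, p.2) (by simp [pvNbr2])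
    have hleftN := hqkN (p.1, p.2 - 1) (by simp [pvNbr2])
    -- the fold over the two neighbours
    simp only [pvNbr2, List.foldl_cons, List.foldl_nil]
    set st0 : PySem.Dict (Int × Int) (Int × Int) × PySem.Dict (Int × Int) (List (Int × Int)) :=
      (PySem.Dict.insert st.1 p p, PySem.Dict.insert st.2 p [p]) with hst0
    obtain ⟨hTU0up, hTU1up⟩ := pvTryUnionPart g rows cols bg (P ++ [p]) S0
      (pvVal g p.1 p.2) p (p.1 - 1, p.2) st0 hEqv0 hpart0 hkp'
      (fun hcd => (hupN hcd).1)
    by_cases hcu : 0 ≤ ((p.1 - 1, p.2) : Int × Int).1 ∧ 0 ≤ ((p.1 - 1, p.2) : Int × Int).2 ∧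
        pvVal g ((p.1 - 1, p.2) : Int × Int).1 ((p.1 - 1, p.2) : Int × Int).2 = pvVal g p.1 p.2
    · -- up union performed
      have hpart1 := hTU1up hcu
      have hEqv1 := pvEqv_join S0 p (p.1 - 1, p.2) hEqv0
      have hsub1 : ∀ a b, pvJoin S0 p (p.1 - 1, p.2) a b →
          pvReachIn g rows cols bg (P ++ [p]) a b :=
        pvJoin_sub S0 _ _ _ hsub0 hRP'Eqv ((hupN hcu).2)
      obtain ⟨hTU0l, hTU1l⟩ := pvTryUnionPart g rows cols bg (P ++ [p])
        (pvJoin S0 p (p.1 - 1, p.2)) (pvVal g p.1 p.2) p (p.1, p.2 - 1)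
        (pvTryUnion g (pvVal g p.1 p.2) p st0 (p.1 - 1, p.2)) hEqv1 hpart1 hkp'
        (fun hcd => (hleftN hcd).1)
      by_cases hcl : 0 ≤ ((p.1, p.2 - 1) : Int × Int).1 ∧
          0 ≤ ((p.1, p.2 - 1) : Int × Int).2 ∧
          pvVal g ((p.1, p.2 - 1) : Int × Int).1 ((p.1, p.2 - 1) : Int × Int).2 =
            pvVal g p.1 p.2
      · have hpart2 := hTU1l hcl
        have hEqv2 := pvEqv_join _ p (p.1, p.2 - 1) hEqv1
        have hsub2 := pvJoin_sub _ _ p (p.1, p.2 - 1) hsub1 hRP'Eqv ((hleftN hcl).2)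
        refine pvPart_congr g rows cols bg (P ++ [p]) (P ++ [p]) _ _ _
          (fun _ => Iff.rfl) ?_ hpart2
        intro q q' _ _
        exact pvFinalE g rows cols bg P rest p hc hpin _ hEqv2 hsub2
          (fun a b h => Or.inl (Or.inl (Or.inl h)))
          (fun hcd => Or.inl (Or.inr (Or.inl ⟨hEqv0.1 p, hEqv0.1 _⟩)))
          (fun hcd => Or.inr (Or.inl ⟨hEqv1.1 p, hEqv1.1 _⟩)) q q'
      · rw [hTU0l hcl]
        refine pvPart_congr g rows cols bg (P ++ [p]) (P ++ [p]) _ _ _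
          (fun _ => Iff.rfl) ?_ hpart1
        intro q q' _ _
        exact pvFinalE g rows cols bg P rest p hc hpin _ hEqv1 hsub1
          (fun a b h => Or.inl (Or.inl h))
          (fun hcd => Or.inr (Or.inl ⟨hEqv0.1 p, hEqv0.1 _⟩))
          (fun hcd => absurd hcd hcl) q q'
    · -- no up union
      rw [hTU0up hcu]
      obtain ⟨hTU0l, hTU1l⟩ := pvTryUnionPart g rows cols bg (P ++ [p]) S0
        (pvVal g p.1 p.2) p (p.1, p.2 - 1) st0 hEqv0 hpart0 hkp'
        (fun hcd => (hleftN hcd).1)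
      by_cases hcl : 0 ≤ ((p.1, p.2 - 1) : Int × Int).1 ∧
          0 ≤ ((p.1, p.2 - 1) : Int × Int).2 ∧
          pvVal g ((p.1, p.2 - 1) : Int × Int).1 ((p.1, p.2 - 1) : Int × Int).2 =
            pvVal g p.1 p.2
      · have hpart1 := hTU1l hcl
        have hEqv1 := pvEqv_join S0 p (p.1, p.2 - 1) hEqv0
        have hsub1 := pvJoin_sub S0 _ p (p.1, p.2 - 1) hsub0 hRP'Eqv ((hleftN hcl).2)
        refine pvPart_congr g rows cols bg (P ++ [p]) (P ++ [p]) _ _ _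
          (fun _ => Iff.rfl) ?_ hpart1
        intro q q' _ _
        exact pvFinalE g rows cols bg P rest p hc hpin _ hEqv1 hsub1
          (fun a b h => Or.inl (Or.inl h))
          (fun hcd => absurd hcd hcu)
          (fun hcd => Or.inr (Or.inl ⟨hEqv0.1 p, hEqv0.1 _⟩)) q q'
      · rw [hTU0l hcl]
        refine pvPart_congr g rows cols bg (P ++ [p]) (P ++ [p]) _ _ _
          (fun _ => Iff.rfl) ?_ hpart0
        intro q q' _ _
        exact pvFinalE g rows cols bg P rest p hc hpin _ hEqv0 hsub0
          (fun a b h => Or.inl h)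
          (fun hcd => absurd hcd hcu)
          (fun hcd => absurd hcd hcl) q q' 

theorem pvScanB_eq (g : List (List Int)) (rows cols bg : Int) :
    pvScanB g rows cols bg = (pvCells rows cols).foldl (pvStepB g bg)
      (PySem.Dict.empty, PySem.Dict.empty) := by
  unfold pvScanB pvCells
  rw [List.foldl_flatMap]
  apply PySem.List.foldl_congr_mem
  intro acc r _
  rw [List.foldl_map]

theorem pvScanB_master (g : List (List Int)) (rows cols bg : Int) :
    pvInvB g rows cols bg (pvCells rows cols) (pvScanB g rows cols bg) := by
  rw [pvScanB_eq]
  refine pvFoldInv (pvStepB g bg) (pvInvB g rows cols bg) (pvCells rows cols)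
    (fun P p rest st hfull hi => pvStepB_inv g rows cols bg P rest p st hfull hi)
    [] (pvCells rows cols) _ rfl ?_
  unfold pvInvB pvPart
  dsimp only
  refine ⟨by simp [PySem.Dict.empty], ?_, ?_, ?_, ?_, ?_⟩
  · intro q
    rw [PySem.Dict.get?_empty]
    unfold pvKeyIn
    simp
  · intro q rep h
    rw [PySem.Dict.get?_empty] at h
    cases h
  · intro rep L hL
    rw [PySem.Dict.get?_empty] at hL
    cases hL
  · intro rep
    rw [PySem.Dict.get?_empty, PySem.Dict.get?_empty]
    simp
  · intro q q' hq _
    exact absurd hq.2.2 (List.not_mem_nil)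

-- ======== B side: bridging to the hole predicate ========

theorem pvReachIn_cells (g : List (List Int)) (rows cols bg : Int) (a b : Int × Int) :
    pvReachIn g rows cols bg (pvCells rows cols) a b ↔ pvReach g rows cols bg a b := by
  constructor
  · exact Relation.ReflTransGen.mono (fun x y h => h.1)
  · refine Relation.ReflTransGen.mono (fun x y h => ?_)
    exact ⟨h, (pvCells_mem rows cols x).mpr h.1, (pvCells_mem rows cols y).mpr h.2.1⟩

theorem pvExistsSeed (g : List (List Int)) (rows cols bg : Int) (q : Int × Int)
    (hq : pvInB rows cols q) (hnb : pvVal g q.1 q.2 ≠ bg) :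
    ∃ s, pvIsSeed g rows cols bg s ∧ pvReach g rows cols bg s q := by
  have hsub : {x | pvReach g rows cols bg q x} ⊆ {x | x ∈ pvCells rows cols} := by
    intro x hx
    exact (pvCells_mem rows cols x).mpr (pvReach_val g rows cols bg q x hq hnb hx).1
  have hfin : Set.Finite {x | pvReach g rows cols bg q x} :=
    Set.Finite.subset (List.finite_toSet (pvCells rows cols)) hsub
  obtain ⟨s, hs, hmin⟩ := Set.exists_min_image _ (fun x : Int × Int => toLex (x.1, x.2))
    hfin ⟨q, Relation.ReflTransGen.refl⟩
  have hsq : pvReach g rows cols bg q s := hs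
  have hsval := pvReach_val g rows cols bg q s hq hnb hsq
  refine ⟨s, ⟨hsval.1, by rw [hsval.2]; exact hnb, ?_⟩, pvReach_symm g rows cols bg q s hsq⟩
  intro x hx
  have hqx : pvReach g rows cols bg q x := hsq.trans hx
  have := hmin x hqx
  rw [Prod.Lex.le_iff] at this
  unfold pvScanLE
  simpa using this

theorem pvBHoles (g : List (List Int)) (rows cols bg : Int) (q : Int × Int) :
    (∃ L ∈ PySem.Dict.values (pvScanB g rows cols bg).2, q ∈ L ∧ pvOddOff L q) ↔
      pvHolePP g rows cols bg (pvCells rows cols) q := by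
  obtain ⟨hNK, hK, hR, hM, hMK, hE⟩ := pvScanB_master g rows cols bg
  constructor
  · rintro ⟨L, hLv, hqL, hodd⟩
    obtain ⟨pr, hpr, hsnd⟩ := List.mem_map.mp hLv
    have hpair : (pr.1, L) ∈ (pvScanB g rows cols bg).2.items := by
      rw [← hsnd]
      exact hpr
    have hget : PySem.Dict.get? (pvScanB g rows cols bg).2 pr.1 = some L :=
      PySem.Dict.get?_of_mem_items _ hpair hNK
    have hmemL := hM pr.1 L hget
    have hlabq : PySem.Dict.get? (pvScanB g rows cols bg).1 q = some pr.1 := (hmemL q).mp hqL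
    have hkq : pvKeyIn g rows cols bg (pvCells rows cols) q :=
      (hK q).mp (by rw [hlabq]; rfl)
    obtain ⟨s, hseed, hsq⟩ := pvExistsSeed g rows cols bg q hkq.1 hkq.2.1
    have hiff : ∀ x, x ∈ L ↔ pvReach g rows cols bg s x := by
      intro x
      rw [hmemL x]
      constructor
      · intro hx
        have hkx : pvKeyIn g rows cols bg (pvCells rows cols) x :=
          (hK x).mp (by rw [hx]; rfl)
        have hsame : pvSame (pvScanB g rows cols bg).1 x q := ⟨pr.1, hx, hlabq⟩
        have hreach := (pvReachIn_cells g rows cols bg x q).mp ((hE x q hkx hkq).mp hsame)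
        exact hsq.trans (pvReach_symm g rows cols bg x q hreach)
      · intro hx
        have hqx : pvReach g rows cols bg q x :=
          (pvReach_symm g rows cols bg s q hsq).trans hx
        have hxv := pvReach_val g rows cols bg q x hkq.1 hkq.2.1 hqx
        have hkx : pvKeyIn g rows cols bg (pvCells rows cols) x :=
          ⟨hxv.1, by rw [hxv.2]; exact hkq.2.1, (pvCells_mem rows cols x).mpr hxv.1⟩
        obtain ⟨rep, h1, h2⟩ := (hE q x hkq hkx).mpr ((pvReachIn_cells g rows cols bg q x).mpr hqx)
        rw [hlabq] at h1
        rw [Option.some.inj h1]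
        exact h2
    refine ⟨s, (pvCells_mem rows cols s).mpr hseed.1, hseed, hsq,
      pvMinFst L, pvMinSnd L, pvClassMin_of_comp g rows cols bg s L hiff, hodd.1, hodd.2⟩
  · rintro ⟨s, hsP, hseed, hsq, mr, mc, hmin, ho1, ho2⟩
    have hqv := pvReach_val g rows cols bg s q hseed.1 hseed.2.1 hsq
    have hkq : pvKeyIn g rows cols bg (pvCells rows cols) q :=
      ⟨hqv.1, by rw [hqv.2]; exact hseed.2.1, (pvCells_mem rows cols q).mpr hqv.1⟩
    obtain ⟨rq, hrq⟩ := Option.isSome_iff_exists.mp ((hK q).mpr hkq)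
    have hroot := hR q rq hrq
    obtain ⟨L, hL⟩ := Option.isSome_iff_exists.mp ((hMK rq).mpr hroot)
    have hmemL := hM rq L hL
    have hqL : q ∈ L := (hmemL q).mpr hrq
    have hiff : ∀ x, x ∈ L ↔ pvReach g rows cols bg s x := by
      intro x
      rw [hmemL x]
      constructor
      · intro hx
        have hkx : pvKeyIn g rows cols bg (pvCells rows cols) x :=
          (hK x).mp (by rw [hx]; rfl)
        have hsame : pvSame (pvScanB g rows cols bg).1 x q := ⟨rq, hx, hrq⟩
        have hreach := (pvReachIn_cells g rows cols bg x q).mp ((hE x q hkx hkq).mp hsame)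
        exact hsq.trans (pvReach_symm g rows cols bg x q hreach)
      · intro hx
        have hqx : pvReach g rows cols bg q x :=
          (pvReach_symm g rows cols bg s q hsq).trans hx
        have hxv := pvReach_val g rows cols bg q x hkq.1 hkq.2.1 hqx
        have hkx : pvKeyIn g rows cols bg (pvCells rows cols) x :=
          ⟨hxv.1, by rw [hxv.2]; exact hkq.2.1, (pvCells_mem rows cols x).mpr hxv.1⟩
        obtain ⟨rep, h1, h2⟩ := (hE q x hkq hkx).mpr ((pvReachIn_cells g rows cols bg q x).mpr hqx)
        rw [hrq] at h1
        rw [Option.some.inj h1]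
        exact h2
    have hcm := pvClassMin_of_comp g rows cols bg s L hiff
    obtain ⟨e1, e2⟩ := pvClassMin_unique g rows cols bg s mr mc _ _ hmin hcm
    refine ⟨L, ?_, hqL, by rw [← e1]; exact ho1, by rw [← e2]; exact ho2⟩
    exact List.mem_map.mpr ⟨(rq, L), PySem.Dict.mem_items_of_get?_eq_some _ hL, rfl⟩

-- ======== write phase: punching holes pointwise ========

theorem pvPunchFold (bg rows cols minr minc : Int) :
    ∀ (l : List (Int × Int)) (gr : List (List Int)), pvShape rows cols gr →
    (∀ x ∈ l, pvInB rows cols x) →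
    pvShape rows cols (l.foldl (fun gr p =>
      if PySem.Int.mod (p.1 - minr) 2 = 1 ∧ PySem.Int.mod (p.2 - minc) 2 = 1 then
        pvSet2 gr p.1 p.2 bg else gr) gr) ∧
    ∀ q, pvInB rows cols q →
      ((q ∈ l ∧ PySem.Int.mod (q.1 - minr) 2 = 1 ∧ PySem.Int.mod (q.2 - minc) 2 = 1 →
        pvVal (l.foldl (fun gr p =>
          if PySem.Int.mod (p.1 - minr) 2 = 1 ∧ PySem.Int.mod (p.2 - minc) 2 = 1 then
            pvSet2 gr p.1 p.2 bg else gr) gr) q.1 q.2 = bg) ∧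
      (¬ (q ∈ l ∧ PySem.Int.mod (q.1 - minr) 2 = 1 ∧ PySem.Int.mod (q.2 - minc) 2 = 1) →
        pvVal (l.foldl (fun gr p =>
          if PySem.Int.mod (p.1 - minr) 2 = 1 ∧ PySem.Int.mod (p.2 - minc) 2 = 1 then
            pvSet2 gr p.1 p.2 bg else gr) gr) q.1 q.2 = pvVal gr q.1 q.2)) := by
  intro l
  induction l with
  | nil =>
    intro gr hs _
    exact ⟨hs, fun q hq => ⟨fun h => absurd h.1 (by simp), fun _ => rfl⟩⟩
  | cons x t ih =>
    intro gr hs hin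
    have hxin : pvInB rows cols x := hin x List.mem_cons_self
    have hs' : pvShape rows cols (if PySem.Int.mod (x.1 - minr) 2 = 1 ∧
        PySem.Int.mod (x.2 - minc) 2 = 1 then pvSet2 gr x.1 x.2 bg else gr) := by
      split
      · exact pvSet2_shape gr rows cols hs x.1 x.2 bg
      · exact hs
    obtain ⟨ihs, ihv⟩ := ih _ hs' (fun y hy => hin y (List.mem_cons_of_mem _ hy))
    simp only [List.foldl_cons]
    refine ⟨ihs, ?_⟩
    intro q hq
    have hgr' : pvVal (if PySem.Int.mod (x.1 - minr) 2 = 1 ∧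
        PySem.Int.mod (x.2 - minc) 2 = 1 then pvSet2 gr x.1 x.2 bg else gr) q.1 q.2 =
        if q = x ∧ PySem.Int.mod (x.1 - minr) 2 = 1 ∧ PySem.Int.mod (x.2 - minc) 2 = 1
        then bg else pvVal gr q.1 q.2 := by
      split
      case isTrue hcx =>
        rw [pvValSet2 gr rows cols hs x.1 x.2 q hxin hq bg]
        by_cases hqx : q = x
        · rw [if_pos (by rw [show ((x.1, x.2) : Int × Int) = x from rfl]; exact hqx),
            if_pos ⟨hqx, hcx⟩]
        · rw [if_neg (by rw [show ((x.1, x.2) : Int × Int) = x from rfl]; exact hqx),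
            if_neg (fun hcon => hqx hcon.1)]
      case isFalse hcx =>
        rw [if_neg (fun hcon => hcx hcon.2)]
    constructor
    · rintro ⟨hmem, ho1, ho2⟩
      rcases List.mem_cons.mp hmem with rfl | hmem
      · by_cases hqt : q ∈ t ∧ PySem.Int.mod (q.1 - minr) 2 = 1 ∧
            PySem.Int.mod (q.2 - minc) 2 = 1
        · exact (ihv q hq).1 hqt
        · rw [(ihv q hq).2 hqt, hgr', if_pos ⟨rfl, ho1, ho2⟩]
      · exact (ihv q hq).1 ⟨hmem, ho1, ho2⟩
    · intro hnc
      have hnt : ¬ (q ∈ t ∧ PySem.Int.mod (q.1 - minr) 2 = 1 ∧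
          PySem.Int.mod (q.2 - minc) 2 = 1) :=
        fun hcon => hnc ⟨List.mem_cons_of_mem _ hcon.1, hcon.2⟩
      rw [(ihv q hq).2 hnt, hgr']
      have hnx : ¬ (q = x ∧ PySem.Int.mod (x.1 - minr) 2 = 1 ∧
          PySem.Int.mod (x.2 - minc) 2 = 1) := by
        rintro ⟨rfl, ho1, ho2⟩
        exact hnc ⟨List.mem_cons_self, ho1, ho2⟩
      rw [if_neg hnx]

theorem pvPunchL_char (bg rows cols : Int) (gr : List (List Int)) (L : List (Int × Int))
    (hs : pvShape rows cols gr) (hin : ∀ x ∈ L, pvInB rows cols x) :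
    pvShape rows cols (pvPunchL bg gr L) ∧
    ∀ q, pvInB rows cols q →
      ((q ∈ L ∧ pvOddOff L q → pvVal (pvPunchL bg gr L) q.1 q.2 = bg) ∧
       (¬ (q ∈ L ∧ pvOddOff L q) →
         pvVal (pvPunchL bg gr L) q.1 q.2 = pvVal gr q.1 q.2)) := by
  have h := pvPunchFold bg rows cols (pvMinFst L) (pvMinSnd L) L gr hs hin
  exact h

theorem pvCompsFold_char (bg rows cols : Int) :
    ∀ (comps : List (List (Int × Int))) (gr : List (List Int)),
    pvShape rows cols gr →
    (∀ L ∈ comps, ∀ x ∈ L, pvInB rows cols x) →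
    pvShape rows cols (comps.foldl (pvPunchL bg) gr) ∧
    ∀ q, pvInB rows cols q →
      (((∃ L ∈ comps, q ∈ L ∧ pvOddOff L q) →
        pvVal (comps.foldl (pvPunchL bg) gr) q.1 q.2 = bg) ∧
       (¬ (∃ L ∈ comps, q ∈ L ∧ pvOddOff L q) →
        pvVal (comps.foldl (pvPunchL bg) gr) q.1 q.2 = pvVal gr q.1 q.2)) := by
  intro comps
  induction comps with
  | nil =>
    intro gr hs _
    exact ⟨hs, fun q hq => ⟨fun h => absurd h (by simp), fun _ => rfl⟩⟩
  | cons L t ih =>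
    intro gr hs hin
    have hLin := hin L List.mem_cons_self
    obtain ⟨hps, hpv⟩ := pvPunchL_char bg rows cols gr L hs hLin
    obtain ⟨ihs, ihv⟩ := ih _ hps (fun L' hL' => hin L' (List.mem_cons_of_mem _ hL'))
    simp only [List.foldl_cons]
    refine ⟨ihs, ?_⟩
    intro q hq
    constructor
    · rintro ⟨L', hL', hmem, hodd⟩
      rcases List.mem_cons.mp hL' with rfl | hL'
      · by_cases hqt : ∃ L'' ∈ t, q ∈ L'' ∧ pvOddOff L'' q
        · exact (ihv q hq).1 hqt
        · rw [(ihv q hq).2 hqt]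
          exact (hpv q hq).1 ⟨hmem, hodd⟩
      · exact (ihv q hq).1 ⟨L', hL', hmem, hodd⟩
    · intro hnc
      have hnt : ¬ ∃ L'' ∈ t, q ∈ L'' ∧ pvOddOff L'' q :=
        fun ⟨L'', hL'', hrest⟩ => hnc ⟨L'', List.mem_cons_of_mem _ hL'', hrest⟩
      rw [(ihv q hq).2 hnt]
      exact (hpv q hq).2 (fun hcon => hnc ⟨L, List.mem_cons_self, hcon⟩)

-- getElem ↔ pvVal bridge
theorem pvVal_elem (m : List (List Int)) (r c : Nat) (hr : r < m.length)
    (hc : c < (m[r]'hr).length) : pvVal m (r : Int) (c : Int) = (m[r]'hr)[c]'hc := by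
  rw [pvVal_eq_getD m _ _ (by omega) (by omega)]
  rw [Int.toNat_natCast, Int.toNat_natCast]
  rw [List.getD_eq_getElem _ _ hr, List.getD_eq_getElem _ _ hc]

-- ======== final assembly ========

def pvBgA (g : List (List Int)) : Int :=
  (PySem.List.pyGetD (PySem.List.sorted (PySem.Dict.items
    ((PySem.List.pyRange 0 (PySem.List.len g) 1).foldl (fun d r =>
      (PySem.List.pyRange 0 (PySem.List.len (PySem.List.pyGetD g 0 [])) 1).foldl (fun d c =>
        PySem.Dict.insert d (pvVal g r c)
          (PySem.Dict.getD d (pvVal g r c) 0 + 1 : Int)) d) PySem.Dict.empty))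
    (fun kv => kv.2) true) 0 ((0, 0) : Int × Int)).1

def pvBgB (g : List (List Int)) : Int :=
  (PySem.List.max? (PySem.Dict.keys
    (g.foldl (fun d row => row.foldl (fun d v =>
      PySem.Dict.insert d v (PySem.Dict.getD d v 0 + 1 : Int)) d) PySem.Dict.empty))
    (fun v => PySem.Dict.getD (g.foldl (fun d row => row.foldl (fun d v =>
      PySem.Dict.insert d v (PySem.Dict.getD d v 0 + 1 : Int)) d) PySem.Dict.empty) v 0)).getD 0

theorem pvTA (g : List (List Int)) : transform g =
    ((pvScanA g (PySem.List.len g) (PySem.List.len (PySem.List.pyGetD g 0 []))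
      (pvBgA g)).2).foldl (pvPunch (pvBgA g)) g := rfl

theorem pvTB (g : List (List Int)) : transform_alt g =
    (PySem.Dict.values (pvScanB g (PySem.List.len g)
      (PySem.List.len (PySem.List.pyGetD g 0 [])) (pvBgB g)).2).foldl
      (pvPunchL (pvBgB g)) g := rfl

theorem pvBg_eq (g : List (List Int))
    (hcols : ∀ row ∈ g, (row.length : Int) = PySem.List.len (PySem.List.pyGetD g 0 [])) :
    pvBgA g = pvBgB g := by
  have h := pvBgEq g (PySem.List.len (PySem.List.pyGetD g 0 [])) hcols
  exact h

theorem pvMainEq (g : List (List Int)) (hpre : Pre_transform g) :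
    transform g = transform_alt g := by
  obtain ⟨hne, hpos, hrl⟩ := hpre
  rw [pvTA, pvTB]
  have hg0 : PySem.List.pyGetD g 0 [] = g.headD [] := by
    rw [PySem.List.pyGetD_of_nonneg _ _ (le_refl 0)]
    cases g with
    | nil => exact absurd rfl hne
    | cons a t => rfl
  set rows := PySem.List.len g with hrowsd
  set cols := PySem.List.len (PySem.List.pyGetD g 0 []) with hcolsd
  have hrows0 : rows.toNat = g.length := by
    rw [hrowsd]
    simp [PySem.List.len]
  have hcols0 : cols.toNat = (g.headD []).length := by
    rw [hcolsd]
    simp [PySem.List.len, hg0]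
  have hcols' : ∀ row ∈ g, (row.length : Int) = cols := by
    intro row hr
    rw [hcolsd, hg0]
    simp [PySem.List.len, hrl row hr]
  have hbg := pvBg_eq g hcols'
  rw [hbg]
  set bg := pvBgB g with hbgd
  have hgs : pvShape rows cols g := by
    refine ⟨hrows0.symm, ?_⟩
    intro row hr
    rw [hcols0]
    exact hrl row hr
  obtain ⟨hA1, hA2, hA3, hA4⟩ := pvScanA_master g rows cols bg
  have hobjinA : ∀ L ∈ (pvScanA g rows cols bg).2.map Prod.snd, ∀ x ∈ L,
      pvInB rows cols x := by
    intro L hL x hx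
    obtain ⟨o, ho, hoL⟩ := List.mem_map.mp hL
    obtain ⟨s, _, hs, _, hiff⟩ := hA3 o ho
    rw [← hoL] at hx
    exact (pvReach_val g rows cols bg s x hs.1 hs.2.1 ((hiff x).mp hx)).1
  obtain ⟨hNK, hK, hR, hM, hMK, hE⟩ := pvScanB_master g rows cols bg
  have hobjinB : ∀ L ∈ PySem.Dict.values (pvScanB g rows cols bg).2, ∀ x ∈ L,
      pvInB rows cols x := by
    intro L hL x hx
    obtain ⟨pr, hpr, hsnd⟩ := List.mem_map.mp hL
    have hpair : (pr.1, L) ∈ (pvScanB g rows cols bg).2.items := by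
      rw [← hsnd]; exact hpr
    have hget := PySem.Dict.get?_of_mem_items _ hpair hNK
    have hx' := (hM pr.1 L hget x).mp hx
    exact ((hK x).mp (by rw [hx']; rfl)).1
  have hfoldA : (pvScanA g rows cols bg).2.foldl (pvPunch bg) g
      = ((pvScanA g rows cols bg).2.map Prod.snd).foldl (pvPunchL bg) g := by
    rw [List.foldl_map]
    rfl
  rw [hfoldA]
  obtain ⟨hFsA, hFvA⟩ := pvCompsFold_char bg rows cols
    ((pvScanA g rows cols bg).2.map Prod.snd) g hgs hobjinA
  obtain ⟨hFsB, hFvB⟩ := pvCompsFold_char bg rows cols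
    (PySem.Dict.values (pvScanB g rows cols bg).2) g hgs hobjinB
  have hholes : ∀ qq : Int × Int,
      (∃ L ∈ (pvScanA g rows cols bg).2.map Prod.snd, qq ∈ L ∧ pvOddOff L qq) ↔
      (∃ L ∈ PySem.Dict.values (pvScanB g rows cols bg).2, qq ∈ L ∧ pvOddOff L qq) := by
    intro qq
    rw [pvBHoles g rows cols bg qq, ← hA4 qq]
    constructor
    · rintro ⟨L, hL, h1, h2⟩
      obtain ⟨o, ho, hoL⟩ := List.mem_map.mp hL
      exact ⟨o, ho, by rw [hoL]; exact h1, by rw [hoL]; exact h2⟩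
    · rintro ⟨o, ho, h1, h2⟩
      exact ⟨o.2, List.mem_map.mpr ⟨o, ho, rfl⟩, h1, h2⟩
  apply List.ext_getElem
  · rw [hFsA.1, hFsB.1]
  intro r h1 h2
  have hrb : r < rows.toNat := by rw [← hFsA.1]; exact h1
  have hrowlenA := hFsA.2 _ (List.getElem_mem h1)
  have hrowlenB := hFsB.2 _ (List.getElem_mem h2)
  apply List.ext_getElem
  · rw [hrowlenA, hrowlenB]
  intro c hc1 hc2
  have hcb : c < cols.toNat := by rw [← hrowlenA]; exact hc1
  have hq : pvInB rows cols ((r : Int), (c : Int)) := by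
    unfold pvInB
    refine ⟨by omega, by omega, by omega, by omega⟩
  have hvA := pvVal_elem _ r c h1 hc1
  have hvB := pvVal_elem _ r c h2 hc2
  rw [← hvA, ← hvB]
  by_cases hH : ∃ L ∈ (pvScanA g rows cols bg).2.map Prod.snd,
      ((r : Int), (c : Int)) ∈ L ∧ pvOddOff L ((r : Int), (c : Int))
  · rw [(hFvA _ hq).1 hH, (hFvB _ hq).1 ((hholes _).mp hH)]
  · rw [(hFvA _ hq).2 hH, (hFvB _ hq).2 (fun hcon => hH ((hholes _).mpr hcon))]

-- ===== VERDICT (by name: the statement is the Claim_ definition above) =====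
theorem transform_spec : Claim_equal_transform := by
  intro g _ hpre
  exact pvMainEq g hpre
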